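-- pv_equiv track=rewrite | github.com/kanghana1/coding-test-study | Baesuyeon_zone/week02/BOJ/BOJ_1389.py | find_kevin_bacon
-- ===== SOURCE A (Python) =====
-- from collections import deque
--
-- def bfs(start, graph, N):
--     # 방문정보 리스트
--     visited = [False] * (N + 1)
--
--     # 도달까지 걸린 횟수 정보 리스트
--     distance = [0] * (N + 1)
--
--     queue = deque([start])
--
--     # 시작 노드 방문 처리
--     visited[start] = True
--
--     while queue:
--         current = queue.popleft()
--
--         for neighbor in graph[current]:
--             if not visited[neighbor]:
--                 visited[neighbor] = True
--
--                 # 이웃 방문 카운트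
--                 distance[neighbor] = distance[current] + 1
--
--                 queue.append(neighbor)
--
--     return sum(distance)  # 모든 거리의 합 == 케빈 베이컨 수
--
-- def find_kevin_bacon(N, edges):
--     # 그래프 생성 (1-indexed)
--     graph = [[] for _ in range(N + 1)]
--
--     for A, B in edges:
--         graph[A].append(B)
--         graph[B].append(A)
--
--     min_score = float('inf')
--     answer = 0
--
--     for i in range(1, N + 1):
--
--         # 각 노드마다 케빈 베이컨 수를 score에 저장
--         score = bfs(i, graph, N)
--
--         # 케빈 베이컨 최솟값 찾기
--         if score < min_score:
--             min_score = score
--             answer = i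
--
--         elif score == min_score and i < answer:
--             answer = i
--
--     return answer
-- ===== SOURCE B (Python) =====
-- def find_kevin_bacon(N, edges):
--     # Per-source Bellman-Ford relaxation over the raw edge list: no adjacency
--     # structure, no queue -- a distance vector is relaxed round by round until
--     # it stops changing (at most N rounds), then the finite entries are summed.
--     INF = N + 1  # strictly larger than any possible hop distance
--
--     def score(start):
--         dist = [INF] * (N + 1)
--         dist[start] = 0
--         for _ in range(N):
--             changed = False
--             for a, b in edges:
--                 if dist[a] + 1 < dist[b]:
--                     dist[b] = dist[a] + 1
--                     changed = True
--                 if dist[b] + 1 < dist[a]: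
--                     dist[a] = dist[b] + 1
--                     changed = True
--             if not changed:
--                 break
--         return sum(x for x in dist if x < INF)
--
--     return min(range(1, N + 1), key=score, default=0)
-- ===== Notes on version B (the rewrite author's own statement) =====
-- stated objective: alternative
-- what changed: Per-source BFS over freshly built adjacency lists (deque, visited array, per-node distance array) is replaced by per-source Bellman-Ford: no graph structure is built at all, a distance vector initialized to a sentinel INF=N+1 is relaxed round by round directly over the raw edge list until a round changes nothing (at most N rounds), and the finite entries are summed; the running-minimum loop is replaced by min(range(1,N+1), key=score, default=0).
import Mathlib
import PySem

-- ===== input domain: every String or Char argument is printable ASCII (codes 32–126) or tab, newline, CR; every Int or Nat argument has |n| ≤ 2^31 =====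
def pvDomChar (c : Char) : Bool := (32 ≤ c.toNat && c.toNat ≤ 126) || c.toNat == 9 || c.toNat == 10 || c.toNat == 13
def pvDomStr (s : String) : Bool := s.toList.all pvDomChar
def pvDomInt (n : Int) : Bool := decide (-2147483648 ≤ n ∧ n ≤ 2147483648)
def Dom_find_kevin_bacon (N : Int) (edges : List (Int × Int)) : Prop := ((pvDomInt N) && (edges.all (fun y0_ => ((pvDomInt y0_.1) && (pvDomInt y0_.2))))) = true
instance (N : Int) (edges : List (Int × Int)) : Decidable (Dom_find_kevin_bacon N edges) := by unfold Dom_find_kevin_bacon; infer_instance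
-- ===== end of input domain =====

-- B replaces A's per-source queue BFS over adjacency lists by per-source Bellman-Ford
-- relaxation rounds over the raw edge list (no adjacency structure, no queue), summing
-- the finite entries of the distance vector; same return value (objective: alternative).

-- ===== PORT A =====
-- graph = [[] for _ in range(N+1)]; for A, B in edges: graph[A].append(B); graph[B].append(A)
def kbGraph (N : Int) (edges : List (Int × Int)) : List (List Int) :=
  edges.foldl (fun g e =>
    let g1 := PySem.List.pySetD g e.1 (PySem.List.pyGetD g e.1 [] ++ [e.2])
    PySem.List.pySetD g1 e.2 (PySem.List.pyGetD g1 e.2 [] ++ [e.1]))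
    (List.replicate (N + 1).toNat [])

-- termination helper for A's BFS loop: marking a vertex visited flips one `false`
lemma pv_count_false_set_true : ∀ (v : List Bool) (k : Nat), v[k]? = some false →
    (v.set k true).count false + 1 = v.count false := by
  intro v
  induction v with
  | nil => intro k h; simp at h
  | cons b rest ih =>
    intro k h
    cases k with
    | zero =>
      simp only [List.getElem?_cons_zero, Option.some.injEq] at h
      subst h; simp
    | succ k =>
      simp only [List.getElem?_cons_succ] at h
      have := ih k h
      simp only [List.set_cons_succ, List.count_cons]
      split <;> omega

-- the guard of the inner loop resolves the Python index and reads `false`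
lemma pv_guard_resolve {v : List Bool} {nb : Int}
    (h : PySem.List.pyGetD v nb true = false) :
    ∃ k, PySem.List.pyIdx? v.length nb = some k ∧ v[k]? = some false ∧
      PySem.List.pySetD v nb true = v.set k true := by
  unfold PySem.List.pyGetD PySem.List.pyGet? at h
  unfold PySem.List.pySetD PySem.List.pySet?
  cases hid : PySem.List.pyIdx? v.length nb with
  | none => rw [hid] at h; simp at h
  | some k =>
    rw [hid] at h
    change (v[k]?).getD true = false at h
    refine ⟨k, rfl, ?_, by simp⟩
    cases hg : v[k]? with
    | none => rw [hg] at h; simp at h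
    | some b => rw [hg] at h; simp at h; simp [h]

-- 'for neighbor in graph[current]: if not visited[neighbor]: …'
def bfsInner (visited : List Bool) (distance : List Int) (queue : List Int)
    (current : Int) : List Int → List Bool × List Int × List Int
  | [] => (visited, distance, queue)
  | nb :: rest =>
    if PySem.List.pyGetD visited nb true = false then
      bfsInner (PySem.List.pySetD visited nb true)
        (PySem.List.pySetD distance nb (PySem.List.pyGetD distance current 0 + 1))
        (queue ++ [nb]) current rest
    else bfsInner visited distance queue current rest

lemma bfsInner_measure (visited : List Bool) (distance : List Int) (queue : List Int)
    (current : Int) : ∀ (nbrs : List Int),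
    2 * ((bfsInner visited distance queue current nbrs).1.count false)
      + (bfsInner visited distance queue current nbrs).2.2.length
    ≤ 2 * visited.count false + queue.length := by
  intro nbrs
  induction nbrs generalizing visited distance queue with
  | nil => simp [bfsInner]
  | cons nb rest ih =>
    by_cases h : PySem.List.pyGetD visited nb true = false
    · obtain ⟨k, _, hget, hset⟩ := pv_guard_resolve h
      have hc := pv_count_false_set_true visited k hget
      have := ih (PySem.List.pySetD visited nb true)
        (PySem.List.pySetD distance nb (PySem.List.pyGetD distance current 0 + 1))
        (queue ++ [nb])
      simp only [bfsInner, h, if_true] at *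
      rw [hset] at this ⊢
      simp only [List.length_append, List.length_cons, List.length_nil] at this ⊢
      omega
    · simp only [bfsInner, h]
      exact ih visited distance queue

-- 'while queue: current = queue.popleft(); …'
def bfsLoop (graph : List (List Int)) (visited : List Bool) (distance : List Int) :
    List Int → List Int
  | [] => distance
  | current :: rest =>
    let s := bfsInner visited distance [] current (PySem.List.pyGetD graph current [])
    bfsLoop graph s.1 s.2.1 (rest ++ s.2.2)
termination_by queue => 2 * visited.count false + queue.length
decreasing_by
  have := bfsInner_measure visited distance [] current (PySem.List.pyGetD graph current [])
  simp only [List.length_append, List.length_cons, List.length_nil] at *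
  omega

-- def bfs(start, graph, N)
def bfs (start : Int) (graph : List (List Int)) (N : Int) : Int :=
  let visited := PySem.List.pySetD (List.replicate (N + 1).toNat false) start true
  let distance := List.replicate (N + 1).toNat (0 : Int)
  (bfsLoop graph visited distance [start]).sum

-- min_score = float('inf') is modelled as `none` (scores are ints; none compares greater)
def find_kevin_bacon (N : Int) (edges : List (Int × Int)) : Int :=
  let graph := kbGraph N edges
  ((PySem.List.pyRange 1 (N + 1) 1).foldl (fun st i =>
    let score := bfs i graph N
    match st.1 with
    | none => (some score, i)
    | some m =>
      if score < m then (some score, i)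
      else if score = m ∧ i < st.2 then (some m, i)
      else st) ((none : Option Int), (0 : Int))).2

-- ===== PORT B =====
-- one edge of a relaxation round: 'if dist[a]+1 < dist[b]: dist[b]=dist[a]+1; changed=True'
-- and then the same with a and b swapped (on the updated vector)
def rxFwd (st : List Int × Bool) (e : Int × Int) : List Int × Bool :=
  if PySem.List.pyGetD st.1 e.1 0 + 1 < PySem.List.pyGetD st.1 e.2 0 then
    (PySem.List.pySetD st.1 e.2 (PySem.List.pyGetD st.1 e.1 0 + 1), true)
  else st

def rxBwd (st : List Int × Bool) (e : Int × Int) : List Int × Bool :=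
  if PySem.List.pyGetD st.1 e.2 0 + 1 < PySem.List.pyGetD st.1 e.1 0 then
    (PySem.List.pySetD st.1 e.1 (PySem.List.pyGetD st.1 e.2 0 + 1), true)
  else st

def rxStep (st : List Int × Bool) (e : Int × Int) : List Int × Bool :=
  rxBwd (rxFwd st e) e

-- 'for _ in range(N): changed=False; (relax all edges); if not changed: break'
def bfRounds (edges : List (Int × Int)) (dist : List Int) : Nat → List Int
  | 0 => dist
  | r + 1 =>
    let s := edges.foldl rxStep (dist, false)
    if s.2 then bfRounds edges s.1 r else s.1

-- dist = [INF]*(N+1); dist[start] = 0; rounds; sum(x for x in dist if x < INF)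
def bfScore (N : Int) (edges : List (Int × Int)) (start : Int) : Int :=
  let dist := PySem.List.pySetD (List.replicate (N + 1).toNat (N + 1)) start 0
  let final := bfRounds edges dist N.toNat
  (final.filter (fun x => x < N + 1)).sum

-- return min(range(1, N + 1), key=score, default=0)
def find_kevin_bacon_alt (N : Int) (edges : List (Int × Int)) : Int :=
  PySem.List.minD (PySem.List.pyRange 1 (N + 1) 1) (bfScore N edges) 0

-- ===== PRECONDITION & SPEC =====
-- Pre_ is exactly A's non-raising domain: every edge endpoint must be a valid Python
-- index into the length-(N+1) adjacency list (negative endpoints wrap and stay inside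
-- the claim); outside it A raises IndexError.
def Pre_find_kevin_bacon (N : Int) (edges : List (Int × Int)) : Prop :=
  ∀ e ∈ edges, (-(N + 1) ≤ e.1 ∧ e.1 ≤ N) ∧ (-(N + 1) ≤ e.2 ∧ e.2 ≤ N)
instance (N : Int) (edges : List (Int × Int)) : Decidable (Pre_find_kevin_bacon N edges) := by
  unfold Pre_find_kevin_bacon; infer_instance

def pvWitness_find_kevin_bacon : Int × (List (Int × Int)) := (4, [(1, 2), (2, 3), (1, 3)])

def Spec_find_kevin_bacon (N : Int) (edges : List (Int × Int)) (out : Int) : Prop := out = find_kevin_bacon_alt N edges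
instance (N : Int) (edges : List (Int × Int)) (out : Int) : Decidable (Spec_find_kevin_bacon N edges out) := by unfold Spec_find_kevin_bacon; infer_instance

-- ===== CLAIM (what is proved, stated in full; the proofs are below) =====
def Claim_equal_find_kevin_bacon : Prop := ∀ (N : Int) (edges : List (Int × Int)), Dom_find_kevin_bacon N edges → Pre_find_kevin_bacon N edges → Spec_find_kevin_bacon N edges (find_kevin_bacon N edges)

-- ===== LEMMAS AND PROOFS =====

-- valid Python index into a length-n list, and its resolution
def pvGood (n : Nat) (i : Int) : Prop := -(n : Int) ≤ i ∧ i < (n : Int)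

def pvIx (n : Nat) (i : Int) : Nat := if 0 ≤ i then i.toNat else n - (-i).toNat

lemma pvIx_lt {n : Nat} {i : Int} (h : pvGood n i) : pvIx n i < n := by
  unfold pvGood at h; unfold pvIx; split <;> omega

lemma pvIdx_good {n : Nat} {i : Int} (h : pvGood n i) :
    PySem.List.pyIdx? n i = some (pvIx n i) := by
  unfold pvGood at h
  unfold PySem.List.pyIdx? pvIx
  split <;> split <;> simp_all <;> omega

lemma pv_getD_good {α : Type} {xs : List α} {n : Nat} {i : Int} (d : α)
    (hl : xs.length = n) (h : pvGood n i) :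
    PySem.List.pyGetD xs i d = xs.getD (pvIx n i) d := by
  unfold PySem.List.pyGetD PySem.List.pyGet?
  rw [hl, pvIdx_good h]
  simp [List.getD_eq_getElem?_getD]

lemma pv_setD_good {α : Type} {xs : List α} {n : Nat} {i : Int} (v : α)
    (hl : xs.length = n) (h : pvGood n i) :
    PySem.List.pySetD xs i v = xs.set (pvIx n i) v := by
  unfold PySem.List.pySetD PySem.List.pySet?
  rw [hl, pvIdx_good h]
  simp

def pvGb (v : List Bool) (j : Nat) : Bool := v.getD j false
def pvGi (d : List Int) (j : Nat) : Int := d.getD j 0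

lemma pvGb_set_self {v : List Bool} {j : Nat} (h : j < v.length) (x : Bool) :
    pvGb (v.set j x) j = x := by
  simp [pvGb, List.getD_eq_getElem?_getD, List.getElem?_set_self h]

lemma pvGb_set_ne {v : List Bool} {j j' : Nat} (h : j' ≠ j) (x : Bool) :
    pvGb (v.set j x) j' = pvGb v j' := by
  simp [pvGb, List.getD_eq_getElem?_getD, List.getElem?_set_ne (by omega : j ≠ j')]

lemma pvGi_set_self {d : List Int} {j : Nat} (h : j < d.length) (x : Int) :
    pvGi (d.set j x) j = x := by
  simp [pvGi, List.getD_eq_getElem?_getD, List.getElem?_set_self h]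

lemma pvGi_set_ne {d : List Int} {j j' : Nat} (h : j' ≠ j) (x : Int) :
    pvGi (d.set j x) j' = pvGi d j' := by
  simp [pvGi, List.getD_eq_getElem?_getD, List.getElem?_set_ne (by omega : j ≠ j')]

lemma pv_sum_set : ∀ (d : List Int) (j : Nat), j < d.length → ∀ (x : Int),
    (d.set j x).sum = d.sum - pvGi d j + x := by
  intro d
  induction d with
  | nil => intro j h; simp at h
  | cons a rest ih =>
    intro j h x
    cases j with
    | zero => simp [pvGi]; ring
    | succ j =>
      simp only [List.set_cons_succ, List.sum_cons]
      have := ih j (by simpa using h) x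
      have hgi : pvGi (a :: rest) (j + 1) = pvGi rest j := by
        simp [pvGi]
      rw [hgi, this]; ring
-- one BFS wave, node-local part: full invariant for bfsInner
lemma bfsInner_spec {n : Nat} {c : Int} {lv : Int} :
    ∀ (nbrs : List Int) (v : List Bool) (d : List Int) (q : List Int),
    v.length = n → d.length = n →
    (∀ x ∈ nbrs, pvGood n x) →
    pvGood n c →
    pvGb v (pvIx n c) = true →
    pvGi d (pvIx n c) = lv →
    (∀ j, j < n → pvGb v j = false → pvGi d j = 0) →
    ∃ new,
      (bfsInner v d q c nbrs).2.2 = q ++ new ∧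
      (bfsInner v d q c nbrs).1.length = n ∧
      (bfsInner v d q c nbrs).2.1.length = n ∧
      (∀ j, pvGb v j = true → pvGb (bfsInner v d q c nbrs).1 j = true) ∧
      (∀ j, pvGb v j = true → pvGi (bfsInner v d q c nbrs).2.1 j = pvGi d j) ∧
      (new.length + (bfsInner v d q c nbrs).1.count false = v.count false) ∧
      (∀ a ∈ new, pvGood n a ∧ pvGb (bfsInner v d q c nbrs).1 (pvIx n a) = true ∧
        pvGi (bfsInner v d q c nbrs).2.1 (pvIx n a) = lv + 1) ∧
      (∀ j, j < n → pvGb (bfsInner v d q c nbrs).1 j = false →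
        pvGi (bfsInner v d q c nbrs).2.1 j = 0) ∧
      (bfsInner v d q c nbrs).2.1.sum = d.sum + (lv + 1) * new.length := by
  intro nbrs
  induction nbrs with
  | nil =>
    intro v d q hv hd _ _ _ _ h0
    exact ⟨[], by simp [bfsInner], by simp [bfsInner, hv], by simp [bfsInner, hd],
      fun j h => by simpa [bfsInner] using h, fun j _ => by simp [bfsInner],
      by simp [bfsInner], by simp, by simpa [bfsInner] using h0, by simp [bfsInner]⟩
  | cons nb rest ih =>
    intro v d q hv hd hnb hc hcv hcd h0
    by_cases hg : PySem.List.pyGetD v nb true = false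
    · -- fresh vertex: mark it, set its distance, enqueue it
      have hgood : pvGood n nb := hnb nb (by simp)
      have hk : pvIx n nb < n := pvIx_lt hgood
      set k := pvIx n nb with hkdef
      have hkl : k < v.length := hv ▸ hk
      have hread : pvGb v k = false := by
        rw [pv_getD_good true hv hgood, ← hkdef] at hg
        simp only [List.getD_eq_getElem?_getD, List.getElem?_eq_getElem hkl,
          Option.getD_some] at hg
        simp only [pvGb, List.getD_eq_getElem?_getD, List.getElem?_eq_getElem hkl,
          Option.getD_some]
        exact hg
      have hset : PySem.List.pySetD v nb true = v.set k true :=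
        pv_setD_good true hv hgood
      have hdist : PySem.List.pyGetD d c 0 = lv := by
        rw [pv_getD_good 0 hd hc]; exact hcd
      have hdset : PySem.List.pySetD d nb (PySem.List.pyGetD d c 0 + 1)
          = d.set k (lv + 1) := by
        rw [hdist]; exact pv_setD_good _ hd hgood
      have hck : pvIx n c ≠ k := fun hne => by rw [hne, hread] at hcv; simp at hcv
      have hvk : v[k]? = some false := by
        have h' := hread
        simp only [pvGb, List.getD_eq_getElem?_getD, List.getElem?_eq_getElem hkl,
          Option.getD_some] at h'
        rw [List.getElem?_eq_getElem hkl, h']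
      have hcnt := pv_count_false_set_true v k hvk
      have h1 : (v.set k true).length = n := by simpa using hv
      have h2 : (d.set k (lv + 1)).length = n := by simpa using hd
      have h3 : ∀ x ∈ rest, pvGood n x := fun x hx => hnb x (by simp [hx])
      have h4 : pvGb (v.set k true) (pvIx n c) = true := by
        rw [pvGb_set_ne hck]; exact hcv
      have h5 : pvGi (d.set k (lv + 1)) (pvIx n c) = lv := by
        rw [pvGi_set_ne hck]; exact hcd
      have h6 : ∀ j, j < n → pvGb (v.set k true) j = false →
          pvGi (d.set k (lv + 1)) j = 0 := by
        intro j hj hf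
        have hjk : j ≠ k := fun he => by
          rw [he, pvGb_set_self (hv ▸ hk) true] at hf; simp at hf
        rw [pvGi_set_ne hjk]
        exact h0 j hj (by rwa [pvGb_set_ne hjk] at hf)
      obtain ⟨new, e1, e2, e3, e4, e5, e6, e7, e8, e9⟩ :=
        ih (v.set k true) (d.set k (lv + 1)) (q ++ [nb]) h1 h2 h3 hc h4 h5 h6
      simp only [bfsInner, hg, if_true, hset, hdset]
      refine ⟨nb :: new, ?_, e2, e3, ?_, ?_, ?_, ?_, e8, ?_⟩
      · rw [e1]; simp
      · intro j hj
        apply e4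
        by_cases hjk : j = k
        · subst hjk; rw [pvGb_set_self (hv ▸ hk) true]
        · rwa [pvGb_set_ne hjk]
      · intro j hj
        have hjk : j ≠ k := fun he => by rw [he, hread] at hj; simp at hj
        rw [e5 j (by rwa [pvGb_set_ne hjk]), pvGi_set_ne hjk]
      · simp only [List.length_cons]; omega
      · intro a ha
        rcases List.mem_cons.mp ha with h | h
        · subst h
          refine ⟨hgood, e4 k (pvGb_set_self (hv ▸ hk) true), ?_⟩
          rw [e5 k (pvGb_set_self (hv ▸ hk) true), pvGi_set_self (hd ▸ hk) (lv + 1)]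
        · exact e7 a h
      · rw [e9, pv_sum_set d k (hd ▸ hk) (lv + 1), h0 k hk hread]
        simp only [List.length_cons]
        push_cast
        ring
    · simp only [bfsInner, hg]
      exact ih v d q hv hd (fun x hx => hnb x (by simp [hx])) hc hcv hcd h0

-- one whole BFS wave (a full level of A's queue), with collected appends
def pvProcA (g : List (List Int)) (v : List Bool) (d : List Int) :
    List Int → List Bool × List Int × List Int
  | [] => (v, d, [])
  | c :: rest =>
    let s := bfsInner v d [] c (PySem.List.pyGetD g c [])
    let t := pvProcA g s.1 s.2.1 rest
    (t.1, t.2.1, s.2.2 ++ t.2.2)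

lemma bfsInner_shift (c : Int) : ∀ (nbrs : List Int) (v : List Bool) (d q : List Int),
    bfsInner v d q c nbrs =
      ((bfsInner v d [] c nbrs).1, (bfsInner v d [] c nbrs).2.1,
        q ++ (bfsInner v d [] c nbrs).2.2) := by
  intro nbrs
  induction nbrs with
  | nil => intro v d q; simp [bfsInner]
  | cons nb rest ih =>
    intro v d q
    by_cases hg : PySem.List.pyGetD v nb true = false
    · simp only [bfsInner, hg, if_true]
      rw [ih _ _ (q ++ [nb]), ih _ _ ([] ++ [nb])]
      simp
    · simp only [bfsInner, hg]
      exact ih v d q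

lemma pvProcA_spec {n : Nat} {g : List (List Int)} {lv : Int}
    (hgl : g.length = n) (hgood : ∀ row ∈ g, ∀ x ∈ row, pvGood n x) :
    ∀ (F : List Int) (v : List Bool) (d : List Int),
    v.length = n → d.length = n →
    (∀ f ∈ F, pvGood n f ∧ pvGb v (pvIx n f) = true ∧ pvGi d (pvIx n f) = lv) →
    (∀ j, j < n → pvGb v j = false → pvGi d j = 0) →
    (pvProcA g v d F).1.length = n ∧
    (pvProcA g v d F).2.1.length = n ∧
    (∀ j, pvGb v j = true → pvGb (pvProcA g v d F).1 j = true) ∧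
    (∀ j, pvGb v j = true → pvGi (pvProcA g v d F).2.1 j = pvGi d j) ∧
    (∀ a ∈ (pvProcA g v d F).2.2, pvGood n a ∧
        pvGb (pvProcA g v d F).1 (pvIx n a) = true ∧
        pvGi (pvProcA g v d F).2.1 (pvIx n a) = lv + 1) ∧
    (∀ j, j < n → pvGb (pvProcA g v d F).1 j = false →
        pvGi (pvProcA g v d F).2.1 j = 0) ∧
    ((pvProcA g v d F).2.2.length + (pvProcA g v d F).1.count false = v.count false) ∧
    (pvProcA g v d F).2.1.sum = d.sum + (lv + 1) * (pvProcA g v d F).2.2.length := by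
  intro F
  induction F with
  | nil =>
    intro v d hv hd _ h0
    exact ⟨by simpa [pvProcA] using hv, by simpa [pvProcA] using hd,
      fun j h => by simpa [pvProcA] using h, fun j _ => by simp [pvProcA],
      by simp [pvProcA], by simpa [pvProcA] using h0, by simp [pvProcA],
      by simp [pvProcA]⟩
  | cons c rest ih =>
    intro v d hv hd hF h0
    obtain ⟨hcg, hcv, hcd⟩ := hF c (by simp)
    have hnbrs : ∀ x ∈ PySem.List.pyGetD g c [], pvGood n x := by
      intro x hx
      have hlt : pvIx n c < g.length := by rw [hgl]; exact pvIx_lt hcg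
      rw [pv_getD_good [] hgl hcg, List.getD_eq_getElem _ _ hlt] at hx
      exact hgood _ (List.getElem_mem _) x hx
    obtain ⟨new, e1, e2, e3, e4, e5, e6, e7, e8, e9⟩ :=
      bfsInner_spec (n := n) (c := c) (lv := lv) (PySem.List.pyGetD g c []) v d []
        hv hd hnbrs hcg hcv hcd h0
    have hnew : (bfsInner v d [] c (PySem.List.pyGetD g c [])).2.2 = new := by
      simpa using e1
    have hFr : ∀ f ∈ rest, pvGood n f ∧
        pvGb (bfsInner v d [] c (PySem.List.pyGetD g c [])).1 (pvIx n f) = true ∧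
        pvGi (bfsInner v d [] c (PySem.List.pyGetD g c [])).2.1 (pvIx n f) = lv := by
      intro f hf
      obtain ⟨hg1, hg2, hg3⟩ := hF f (by simp [hf])
      exact ⟨hg1, e4 _ hg2, by rw [e5 _ hg2]; exact hg3⟩
    obtain ⟨i1, i2, i3, i4, i5, i6, i7, i8⟩ :=
      ih (bfsInner v d [] c (PySem.List.pyGetD g c [])).1
        (bfsInner v d [] c (PySem.List.pyGetD g c [])).2.1 e2 e3 hFr e8
    have hunf : pvProcA g v d (c :: rest) =
        ((pvProcA g (bfsInner v d [] c (PySem.List.pyGetD g c [])).1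
            (bfsInner v d [] c (PySem.List.pyGetD g c [])).2.1 rest).1,
         (pvProcA g (bfsInner v d [] c (PySem.List.pyGetD g c [])).1
            (bfsInner v d [] c (PySem.List.pyGetD g c [])).2.1 rest).2.1,
         (bfsInner v d [] c (PySem.List.pyGetD g c [])).2.2 ++
         (pvProcA g (bfsInner v d [] c (PySem.List.pyGetD g c [])).1
            (bfsInner v d [] c (PySem.List.pyGetD g c [])).2.1 rest).2.2) := rfl
    rw [hunf, hnew]
    refine ⟨i1, i2, fun j hj => i3 j (e4 j hj),
      fun j hj => by rw [i4 j (e4 j hj)]; exact e5 j hj, ?_, i6, ?_, ?_⟩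
    · intro a ha
      rcases List.mem_append.mp ha with h | h
      · obtain ⟨p1, p2, p3⟩ := e7 a h
        exact ⟨p1, i3 _ p2, by rw [i4 _ p2]; exact p3⟩
      · exact i5 a h
    · simp only [List.length_append]
      omega
    · rw [i8, e9]
      simp only [List.length_append]
      push_cast
      ring

lemma pv_batch (g : List (List Int)) : ∀ (F G : List Int) (v : List Bool) (d : List Int),
    bfsLoop g v d (F ++ G) =
      bfsLoop g (pvProcA g v d F).1 (pvProcA g v d F).2.1
        (G ++ (pvProcA g v d F).2.2) := by
  intro F
  induction F with
  | nil => intro G v d; simp [pvProcA]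
  | cons c rest ih =>
    intro G v d
    rw [List.cons_append, bfsLoop]
    rw [show (rest ++ G) ++ (bfsInner v d [] c (PySem.List.pyGetD g c [])).2.2
        = rest ++ (G ++ (bfsInner v d [] c (PySem.List.pyGetD g c [])).2.2)
      from List.append_assoc _ _ _]
    rw [ih (G ++ (bfsInner v d [] c (PySem.List.pyGetD g c [])).2.2)
      (bfsInner v d [] c (PySem.List.pyGetD g c [])).1
      (bfsInner v d [] c (PySem.List.pyGetD g c [])).2.1]
    have hunf : pvProcA g v d (c :: rest) =
        ((pvProcA g (bfsInner v d [] c (PySem.List.pyGetD g c [])).1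
            (bfsInner v d [] c (PySem.List.pyGetD g c [])).2.1 rest).1,
         (pvProcA g (bfsInner v d [] c (PySem.List.pyGetD g c [])).1
            (bfsInner v d [] c (PySem.List.pyGetD g c [])).2.1 rest).2.1,
         (bfsInner v d [] c (PySem.List.pyGetD g c [])).2.2 ++
         (pvProcA g (bfsInner v d [] c (PySem.List.pyGetD g c [])).1
            (bfsInner v d [] c (PySem.List.pyGetD g c [])).2.1 rest).2.2) := rfl
    rw [hunf]
    simp [List.append_assoc]

-- ghost level-synchronous view of A's BFS (proof device only)
def expandNode (visited : List Bool) (nxt : List Int) : List Int → List Bool × List Int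
  | [] => (visited, nxt)
  | nb :: rest =>
    if PySem.List.pyGetD visited nb true = false then
      expandNode (PySem.List.pySetD visited nb true) (nxt ++ [nb]) rest
    else expandNode visited nxt rest

lemma expandNode_measure (visited : List Bool) (nxt : List Int) : ∀ (nbrs : List Int),
    2 * ((expandNode visited nxt nbrs).1.count false)
      + (expandNode visited nxt nbrs).2.length
    ≤ 2 * visited.count false + nxt.length := by
  intro nbrs
  induction nbrs generalizing visited nxt with
  | nil => simp [expandNode]
  | cons nb rest ih =>
    by_cases h : PySem.List.pyGetD visited nb true = false
    · obtain ⟨k, _, hget, hset⟩ := pv_guard_resolve h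
      have hc := pv_count_false_set_true visited k hget
      have := ih (PySem.List.pySetD visited nb true) (nxt ++ [nb])
      simp only [expandNode, h, if_true] at *
      rw [hset] at this ⊢
      simp only [List.length_append, List.length_cons, List.length_nil] at this ⊢
      omega
    · simp only [expandNode, h]
      exact ih visited nxt

def expandLevel (graph : List (List Int)) (visited : List Bool) (nxt : List Int) :
    List Int → List Bool × List Int
  | [] => (visited, nxt)
  | cur :: rest =>
    let s := expandNode visited nxt (PySem.List.pyGetD graph cur [])
    expandLevel graph s.1 s.2 rest

lemma expandLevel_measure (graph : List (List Int)) (visited : List Bool) (nxt : List Int) :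
    ∀ (frontier : List Int),
    2 * ((expandLevel graph visited nxt frontier).1.count false)
      + (expandLevel graph visited nxt frontier).2.length
    ≤ 2 * visited.count false + nxt.length := by
  intro frontier
  induction frontier generalizing visited nxt with
  | nil => simp [expandLevel]
  | cons cur rest ih =>
    simp only [expandLevel]
    have h1 := expandNode_measure visited nxt (PySem.List.pyGetD graph cur [])
    have h2 := ih (expandNode visited nxt (PySem.List.pyGetD graph cur [])).1
      (expandNode visited nxt (PySem.List.pyGetD graph cur [])).2
    omega

def levelLoop (graph : List (List Int)) (visited : List Bool) (frontier : List Int)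
    (depth total : Int) : Int :=
  match frontier with
  | [] => total
  | _ :: _ =>
    let s := expandLevel graph visited [] frontier
    levelLoop graph s.1 s.2 (depth + 1) (total + (depth + 1) * (s.2.length : Int))
termination_by 2 * visited.count false + frontier.length
decreasing_by
  have := expandLevel_measure graph visited [] frontier
  simp only [List.length_cons, List.length_nil] at this ⊢
  omega

lemma expandNode_eq (c : Int) : ∀ (nbrs : List Int) (v : List Bool) (d q : List Int),
    expandNode v q nbrs = ((bfsInner v d q c nbrs).1, (bfsInner v d q c nbrs).2.2) := by
  intro nbrs
  induction nbrs with
  | nil => intro v d q; simp [expandNode, bfsInner]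
  | cons nb rest ih =>
    intro v d q
    by_cases hg : PySem.List.pyGetD v nb true = false
    · simp only [expandNode, bfsInner, hg, if_true]
      exact ih _ _ _
    · simp only [expandNode, bfsInner, hg]
      exact ih _ _ _

lemma expandLevel_eq (g : List (List Int)) : ∀ (F : List Int) (v : List Bool) (q d : List Int),
    expandLevel g v q F = ((pvProcA g v d F).1, q ++ (pvProcA g v d F).2.2) := by
  intro F
  induction F with
  | nil => intro v q d; simp [expandLevel, pvProcA]
  | cons c rest ih =>
    intro v q d
    simp only [expandLevel]
    rw [expandNode_eq c (PySem.List.pyGetD g c []) v d q,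
      bfsInner_shift c (PySem.List.pyGetD g c []) v d q]
    rw [ih _ _ (bfsInner v d [] c (PySem.List.pyGetD g c [])).2.1]
    have hunf : pvProcA g v d (c :: rest) =
        ((pvProcA g (bfsInner v d [] c (PySem.List.pyGetD g c [])).1
            (bfsInner v d [] c (PySem.List.pyGetD g c [])).2.1 rest).1,
         (pvProcA g (bfsInner v d [] c (PySem.List.pyGetD g c [])).1
            (bfsInner v d [] c (PySem.List.pyGetD g c [])).2.1 rest).2.1,
         (bfsInner v d [] c (PySem.List.pyGetD g c [])).2.2 ++
         (pvProcA g (bfsInner v d [] c (PySem.List.pyGetD g c [])).1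
            (bfsInner v d [] c (PySem.List.pyGetD g c [])).2.1 rest).2.2) := rfl
    rw [hunf]
    simp [List.append_assoc]

-- A's queue BFS computes precisely the level-synchronous running sum
lemma pv_main {n : Nat} {g : List (List Int)} (hgl : g.length = n)
    (hgood : ∀ row ∈ g, ∀ x ∈ row, pvGood n x) :
    ∀ (fuel : Nat) (v : List Bool) (d F : List Int) (lv : Int),
    2 * v.count false + F.length ≤ fuel →
    v.length = n → d.length = n →
    (∀ f ∈ F, pvGood n f ∧ pvGb v (pvIx n f) = true ∧ pvGi d (pvIx n f) = lv) →
    (∀ j, j < n → pvGb v j = false → pvGi d j = 0) →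
    (bfsLoop g v d F).sum = levelLoop g v F lv d.sum := by
  intro fuel
  induction fuel with
  | zero =>
    intro v d F lv hfuel hv hd hF h0
    cases F with
    | nil => rw [bfsLoop, levelLoop]
    | cons c rest => simp at hfuel
  | succ fuel ih =>
    intro v d F lv hfuel hv hd hF h0
    cases F with
    | nil => rw [bfsLoop, levelLoop]
    | cons c rest =>
      obtain ⟨j1, j2, j3, j4, j5, j6, j7, j8⟩ :=
        pvProcA_spec hgl hgood (c :: rest) v d hv hd hF h0
      have hbatch := pv_batch g (c :: rest) [] v d
      rw [List.append_nil] at hbatch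
      rw [hbatch, List.nil_append]
      conv_rhs => rw [levelLoop]
      rw [expandLevel_eq g (c :: rest) v [] d]
      simp only [List.nil_append]
      have hrec := ih (pvProcA g v d (c :: rest)).1 (pvProcA g v d (c :: rest)).2.1
        (pvProcA g v d (c :: rest)).2.2 (lv + 1)
        (by simp only [List.length_cons] at hfuel; omega) j1 j2 j5 j6
      rw [hrec, j8]

-- one edge insertion of the adjacency-building fold
def pvGStep (g : List (List Int)) (e : Int × Int) : List (List Int) :=
  let g1 := PySem.List.pySetD g e.1 (PySem.List.pyGetD g e.1 [] ++ [e.2])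
  PySem.List.pySetD g1 e.2 (PySem.List.pyGetD g1 e.2 [] ++ [e.1])

lemma pvGStep_spec {n : Nat} {g0 : List (List Int)} {e : Int × Int}
    (h1 : g0.length = n) (h2 : ∀ row ∈ g0, ∀ x ∈ row, pvGood n x)
    (ha : pvGood n e.1) (hb : pvGood n e.2) :
    (pvGStep g0 e).length = n ∧ ∀ row ∈ pvGStep g0 e, ∀ x ∈ row, pvGood n x := by
  have step : ∀ (g : List (List Int)) (u w : Int), g.length = n →
      (∀ row ∈ g, ∀ x ∈ row, pvGood n x) → pvGood n u → pvGood n w →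
      (PySem.List.pySetD g u (PySem.List.pyGetD g u [] ++ [w])).length = n ∧
      (∀ row ∈ PySem.List.pySetD g u (PySem.List.pyGetD g u [] ++ [w]),
        ∀ x ∈ row, pvGood n x) := by
    intro g u w hg hrows hu hw
    rw [pv_setD_good _ hg hu]
    refine ⟨by simpa using hg, ?_⟩
    intro row hr x hx
    rcases List.mem_or_eq_of_mem_set hr with h | h
    · exact hrows row h x hx
    · subst h
      rcases List.mem_append.mp hx with h | h
      · have hlt : pvIx n u < g.length := by rw [hg]; exact pvIx_lt hu
        rw [pv_getD_good [] hg hu, List.getD_eq_getElem _ _ hlt] at h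
        exact hrows _ (List.getElem_mem _) x h
      · simp at h; subst h; exact hw
  obtain ⟨k1, k2⟩ := step g0 e.1 e.2 h1 h2 ha hb
  exact step _ e.2 e.1 k1 k2 hb ha

lemma pv_graph_fold {n : Nat} :
    ∀ (es : List (Int × Int)) (g0 : List (List Int)),
    g0.length = n → (∀ row ∈ g0, ∀ x ∈ row, pvGood n x) →
    (∀ e ∈ es, pvGood n e.1 ∧ pvGood n e.2) →
    (es.foldl pvGStep g0).length = n ∧
    (∀ row ∈ es.foldl pvGStep g0, ∀ x ∈ row, pvGood n x) := by
  intro es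
  induction es with
  | nil => intro g0 h1 h2 _; exact ⟨h1, h2⟩
  | cons e rest ih =>
    intro g0 h1 h2 h3
    obtain ⟨ha, hb⟩ := h3 e (by simp)
    obtain ⟨k1, k2⟩ := pvGStep_spec h1 h2 ha hb
    simp only [List.foldl_cons]
    exact ih (pvGStep g0 e) k1 k2 (fun e' he' => h3 e' (by simp [he']))

lemma kbGraph_spec {N : Int} {edges : List (Int × Int)} (hN : 0 ≤ N)
    (hpre : Pre_find_kevin_bacon N edges) :
    (kbGraph N edges).length = (N + 1).toNat ∧
    ∀ row ∈ kbGraph N edges, ∀ x ∈ row, pvGood (N + 1).toNat x := by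
  have hn : (((N + 1).toNat : Int)) = N + 1 := Int.toNat_of_nonneg (by omega)
  have heq : kbGraph N edges = edges.foldl pvGStep (List.replicate (N + 1).toNat []) := rfl
  rw [heq]
  refine pv_graph_fold edges _ (by simp) ?_ ?_
  · intro row hr x hx
    rw [List.eq_of_mem_replicate hr] at hx
    simp at hx
  · intro e he
    obtain ⟨⟨u1, u2⟩, u3, u4⟩ := hpre e he
    exact ⟨⟨by omega, by omega⟩, ⟨by omega, by omega⟩⟩
-- ===== shared graph semantics: balls and levels of the edge relation =====

def goodE (n : Nat) (E : List (Int × Int)) : Prop :=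
  ∀ e ∈ E, pvGood n e.1 ∧ pvGood n e.2

def adjB (n : Nat) (E : List (Int × Int)) (p j : Nat) : Bool :=
  E.any (fun e => (pvIx n e.1 == p && pvIx n e.2 == j) || (pvIx n e.2 == p && pvIx n e.1 == j))

def ballB (n : Nat) (E : List (Int × Int)) (s : Nat) : Nat → Nat → Bool
  | 0, j => j == s
  | d + 1, j => ballB n E s d j || (List.range n).any (fun p => ballB n E s d p && adjB n E p j)

def lvlB (n : Nat) (E : List (Int × Int)) (s : Nat) : Nat → Nat → Bool
  | 0, j => ballB n E s 0 j
  | d + 1, j => ballB n E s (d + 1) j && !(ballB n E s d j)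

def levI (n : Nat) (E : List (Int × Int)) (s : Nat) (j : Nat) : Int :=
  ∑ d ∈ Finset.range (n + 1), (if lvlB n E s d j then (d : Int) else 0)

lemma ballB_zero (n : Nat) (E : List (Int × Int)) (s j : Nat) :
    ballB n E s 0 j = (j == s) := rfl

lemma ballB_succ (n : Nat) (E : List (Int × Int)) (s d j : Nat) :
    ballB n E s (d + 1) j =
      (ballB n E s d j || (List.range n).any (fun p => ballB n E s d p && adjB n E p j)) := rfl

lemma lvlB_zero (n : Nat) (E : List (Int × Int)) (s j : Nat) :
    lvlB n E s 0 j = (j == s) := rfl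

lemma lvlB_succ (n : Nat) (E : List (Int × Int)) (s d j : Nat) :
    lvlB n E s (d + 1) j = (ballB n E s (d + 1) j && !(ballB n E s d j)) := rfl

lemma ballB_zero_self (n : Nat) (E : List (Int × Int)) (s : Nat) :
    ballB n E s 0 s = true := by
  rw [ballB_zero]; exact beq_self_eq_true s

lemma lvlB_zero_self (n : Nat) (E : List (Int × Int)) (s : Nat) :
    lvlB n E s 0 s = true := by
  rw [lvlB_zero]; exact beq_self_eq_true s

lemma lvlB_zero_eq {n : Nat} {E : List (Int × Int)} {s j : Nat}
    (h : lvlB n E s 0 j = true) : j = s := by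
  rw [lvlB_zero] at h; exact beq_iff_eq.mp h

lemma ball_succ_mono {n : Nat} {E : List (Int × Int)} {s d j : Nat}
    (h : ballB n E s d j = true) : ballB n E s (d + 1) j = true := by
  rw [ballB_succ, h, Bool.true_or]

lemma ball_le {n : Nat} {E : List (Int × Int)} {s : Nat} {d d' j : Nat} (hdd : d ≤ d')
    (h : ballB n E s d j = true) : ballB n E s d' j = true := by
  induction d' with
  | zero =>
    have : d = 0 := by omega
    subst this; exact h
  | succ d' ih =>
    rcases Nat.lt_or_ge d (d' + 1) with hlt | hge
    · exact ball_succ_mono (ih (by omega))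
    · have : d = d' + 1 := by omega
      subst this; exact h

lemma adj_lt {n : Nat} {E : List (Int × Int)} {p j : Nat} (hE : goodE n E)
    (h : adjB n E p j = true) : p < n ∧ j < n := by
  obtain ⟨e, he, hcond⟩ := List.any_eq_true.mp h
  obtain ⟨g1, g2⟩ := hE e he
  have l1 := pvIx_lt g1
  have l2 := pvIx_lt g2
  rcases Bool.or_eq_true_iff.mp hcond with hc | hc <;>
    · obtain ⟨c1, c2⟩ := Bool.and_eq_true_iff.mp hc
      have c1' := beq_iff_eq.mp c1
      have c2' := beq_iff_eq.mp c2
      omega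

lemma adj_edge_exists {n : Nat} {E : List (Int × Int)} {p q : Nat}
    (h : adjB n E p q = true) :
    ∃ e ∈ E, (pvIx n e.1 = p ∧ pvIx n e.2 = q) ∨ (pvIx n e.2 = p ∧ pvIx n e.1 = q) := by
  obtain ⟨e, he, hc⟩ := List.any_eq_true.mp h
  rcases Bool.or_eq_true_iff.mp hc with h' | h'
  · obtain ⟨c1, c2⟩ := Bool.and_eq_true_iff.mp h'
    exact ⟨e, he, Or.inl ⟨beq_iff_eq.mp c1, beq_iff_eq.mp c2⟩⟩
  · obtain ⟨c1, c2⟩ := Bool.and_eq_true_iff.mp h'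
    exact ⟨e, he, Or.inr ⟨beq_iff_eq.mp c1, beq_iff_eq.mp c2⟩⟩

lemma adj_of_edge {n : Nat} {E : List (Int × Int)} {e : Int × Int} (he : e ∈ E) :
    adjB n E (pvIx n e.1) (pvIx n e.2) = true ∧
    adjB n E (pvIx n e.2) (pvIx n e.1) = true := by
  constructor <;>
    · refine List.any_eq_true.mpr ⟨e, he, ?_⟩
      simp

lemma ball_lt {n : Nat} {E : List (Int × Int)} {s : Nat} (hE : goodE n E) (hs : s < n) :
    ∀ {d j}, ballB n E s d j = true → j < n := by
  intro d
  induction d with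
  | zero =>
    intro j h
    rw [ballB_zero] at h
    have := beq_iff_eq.mp h
    omega
  | succ d ih =>
    intro j h
    rw [ballB_succ] at h
    rcases Bool.or_eq_true_iff.mp h with h1 | h1
    · exact ih h1
    · obtain ⟨p, _, hc⟩ := List.any_eq_true.mp h1
      exact (adj_lt hE (Bool.and_eq_true_iff.mp hc).2).2

lemma lvl_ball {n : Nat} {E : List (Int × Int)} {s : Nat} {d j : Nat}
    (h : lvlB n E s d j = true) : ballB n E s d j = true := by
  cases d with
  | zero => rw [lvlB_zero] at h; rw [ballB_zero]; exact h
  | succ d =>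
    rw [lvlB_succ] at h
    exact (Bool.and_eq_true_iff.mp h).1

lemma lvl_not_ball_lt {n : Nat} {E : List (Int × Int)} {s : Nat} {d d' j : Nat}
    (hd : d' < d) (h : lvlB n E s d j = true) : ballB n E s d' j = false := by
  cases d with
  | zero => omega
  | succ d =>
    rw [lvlB_succ] at h
    have h2 := (Bool.and_eq_true_iff.mp h).2
    have h2' : ballB n E s d j = false := by
      cases hx : ballB n E s d j
      · rfl
      · rw [hx] at h2; exact Bool.noConfusion h2
    cases hx : ballB n E s d' j
    · rfl
    · have := ball_le (show d' ≤ d by omega) hx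
      rw [this] at h2'; exact Bool.noConfusion h2'

lemma ball_to_lvl {n : Nat} {E : List (Int × Int)} {s : Nat} :
    ∀ {d j}, ballB n E s d j = true → ∃ d' ≤ d, lvlB n E s d' j = true := by
  intro d
  induction d with
  | zero =>
    intro j h
    refine ⟨0, le_refl 0, ?_⟩
    rw [lvlB_zero]; rw [ballB_zero] at h; exact h
  | succ d ih =>
    intro j h
    cases hb : ballB n E s d j
    · refine ⟨d + 1, le_refl _, ?_⟩
      rw [lvlB_succ, h, hb]
      rfl
    · obtain ⟨d', hle, hl⟩ := ih hb
      exact ⟨d', by omega, hl⟩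

lemma lvl_unique {n : Nat} {E : List (Int × Int)} {s : Nat} {d d' j : Nat}
    (h : lvlB n E s d j = true) (h' : lvlB n E s d' j = true) : d = d' := by
  by_contra hne
  rcases Nat.lt_or_ge d d' with hlt | hge
  · have := lvl_not_ball_lt hlt h'
    rw [lvl_ball h] at this; exact Bool.noConfusion this
  · have hlt : d' < d := by omega
    have := lvl_not_ball_lt hlt h
    rw [lvl_ball h'] at this; exact Bool.noConfusion this

lemma ball_of_lvl_adj {n : Nat} {E : List (Int × Int)} {s : Nat} {d p j : Nat}
    (hp : p < n) (hbp : ballB n E s d p = true) (hadj : adjB n E p j = true) :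
    ballB n E s (d + 1) j = true := by
  rw [ballB_succ]
  refine Bool.or_eq_true_iff.mpr (Or.inr ?_)
  refine List.any_eq_true.mpr ⟨p, List.mem_range.mpr hp, ?_⟩
  rw [hbp, hadj]
  rfl

lemma ball_succ_via_lvl {n : Nat} {E : List (Int × Int)} {s : Nat} (hE : goodE n E)
    (hs : s < n) (d j : Nat) :
    ballB n E s (d + 1) j =
      (ballB n E s d j || (List.range n).any (fun p => lvlB n E s d p && adjB n E p j)) := by
  cases hball : ballB n E s (d + 1) j
  · symm
    rw [Bool.or_eq_false_iff]
    have hb : ballB n E s d j = false := by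
      cases hx : ballB n E s d j
      · rfl
      · rw [ball_succ_mono hx] at hball; exact Bool.noConfusion hball
    refine ⟨hb, ?_⟩
    rw [List.any_eq_false]
    intro p hp
    cases hlp : lvlB n E s d p
    · simp
    · cases hap : adjB n E p j
      · simp [hap]
      · have : ballB n E s (d + 1) j = true :=
          ball_of_lvl_adj (List.mem_range.mp hp) (lvl_ball hlp) hap
        rw [this] at hball; exact Bool.noConfusion hball
  · symm
    rw [Bool.or_eq_true_iff]
    rw [ballB_succ] at hball
    rcases Bool.or_eq_true_iff.mp hball with h1 | h1
    · left; exact h1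
    · obtain ⟨p, hp, hc⟩ := List.any_eq_true.mp h1
      obtain ⟨c1, c2⟩ := Bool.and_eq_true_iff.mp hc
      obtain ⟨dp, hdp, hlp⟩ := ball_to_lvl c1
      rcases Nat.lt_or_ge dp d with hlt | hge
      · -- p already at a lower level: j was in the ball earlier
        left
        have := ball_of_lvl_adj (List.mem_range.mp hp) (lvl_ball hlp) c2
        exact ball_le (show dp + 1 ≤ d by omega) this
      · have : dp = d := by omega
        subst this
        right
        refine List.any_eq_true.mpr ⟨p, hp, ?_⟩
        rw [hlp, c2]
        rfl

lemma lvl_empty_succ {n : Nat} {E : List (Int × Int)} {s : Nat} {d : Nat}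
    (h : ∀ j, lvlB n E s (d + 1) j = false) :
    ∀ j, lvlB n E s (d + 2) j = false := by
  have hstab : ∀ j, ballB n E s (d + 1) j = ballB n E s d j := by
    intro j
    cases hb : ballB n E s d j
    · cases hb1 : ballB n E s (d + 1) j
      · rfl
      · have : lvlB n E s (d + 1) j = true := by
          rw [lvlB_succ, hb1, hb]
          rfl
        rw [h j] at this; exact Bool.noConfusion this
    · exact ball_succ_mono hb
  intro j
  have hup : ballB n E s (d + 2) j = ballB n E s (d + 1) j := by
    rw [ballB_succ n E s (d + 1) j]
    simp only [hstab]
    rw [← ballB_succ n E s d j, hstab j]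
  rw [lvlB_succ, hup]
  cases hx : ballB n E s (d + 1) j <;> simp [hx]

lemma lvl_empty_ge {n : Nat} {E : List (Int × Int)} {s : Nat} {d : Nat}
    (h : ∀ j, lvlB n E s (d + 1) j = false) :
    ∀ k j, lvlB n E s (d + 1 + k) j = false := by
  intro k
  induction k with
  | zero => exact h
  | succ k ih =>
    have hstep := lvl_empty_succ (d := d + k) (fun j => by
      have := ih j
      have harith : d + 1 + k = d + k + 1 := by omega
      rwa [harith] at this)
    intro j
    have h2 := hstep j
    have harith : d + k + 2 = d + 1 + (k + 1) := by omega
    rwa [harith] at h2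

lemma lvl_chain {n : Nat} {E : List (Int × Int)} {s : Nat} {d j : Nat}
    (h : lvlB n E s d j = true) : ∀ d' ≤ d, ∃ j', lvlB n E s d' j' = true := by
  intro d' hle
  by_contra hno
  push_neg at hno
  have hempty : ∀ j', lvlB n E s d' j' = false := by
    intro j'
    cases hx : lvlB n E s d' j'
    · rfl
    · exact absurd hx (hno j')
  cases d' with
  | zero =>
    have := lvlB_zero_self n E s
    rw [hempty s] at this; exact Bool.noConfusion this
  | succ d0 =>
    rcases Nat.lt_or_ge d (d0 + 1) with hlt | hge
    · omega
    · have := lvl_empty_ge (d := d0) hempty (d - (d0 + 1)) j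
      have harith : d0 + 1 + (d - (d0 + 1)) = d := by omega
      rw [harith, h] at this
      exact Bool.noConfusion this

lemma lvl_lt_n {n : Nat} {E : List (Int × Int)} {s : Nat} (hE : goodE n E) (hs : s < n)
    {d j : Nat} (h : lvlB n E s d j = true) : d < n := by
  by_contra hge
  push_neg at hge
  set L : Nat → Finset Nat := fun d' => (Finset.range n).filter (fun j' => lvlB n E s d' j' = true)
    with hL
  have hne : ∀ d' ∈ Finset.range (d + 1), 1 ≤ (L d').card := by
    intro d' hd'
    obtain ⟨j', hj'⟩ := lvl_chain h d' (by
      have := Finset.mem_range.mp hd'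
      omega)
    have hjlt : j' < n := ball_lt hE hs (lvl_ball hj')
    have : j' ∈ L d' := by
      rw [hL]
      exact Finset.mem_filter.mpr ⟨Finset.mem_range.mpr hjlt, hj'⟩
    exact Finset.card_pos.mpr ⟨j', this⟩
  have hdisj : ∀ d1 ∈ Finset.range (d + 1), ∀ d2 ∈ Finset.range (d + 1), d1 ≠ d2 →
      Disjoint (L d1) (L d2) := by
    intro d1 _ d2 _ hne12
    rw [Finset.disjoint_left]
    intro a ha1 ha2
    rw [hL] at ha1 ha2
    exact hne12 (lvl_unique (Finset.mem_filter.mp ha1).2 (Finset.mem_filter.mp ha2).2)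
  have hsum : ∑ d' ∈ Finset.range (d + 1), (L d').card
      = ((Finset.range (d + 1)).biUnion L).card := (Finset.card_biUnion hdisj).symm
  have hsub : (Finset.range (d + 1)).biUnion L ⊆ Finset.range n := by
    intro a ha
    obtain ⟨d', _, ha'⟩ := Finset.mem_biUnion.mp ha
    exact (Finset.mem_filter.mp ha').1
  have hle1 : (d + 1 : Nat) ≤ ∑ d' ∈ Finset.range (d + 1), (L d').card := by
    calc (d + 1 : Nat) = ∑ _d' ∈ Finset.range (d + 1), 1 := by simp
    _ ≤ ∑ d' ∈ Finset.range (d + 1), (L d').card := Finset.sum_le_sum hne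
  have hle2 : ((Finset.range (d + 1)).biUnion L).card ≤ n := by
    have := Finset.card_le_card hsub
    simpa using this
  omega

lemma levI_eq {n : Nat} {E : List (Int × Int)} {s : Nat} (hE : goodE n E) (hs : s < n)
    {d j : Nat} (h : lvlB n E s d j = true) : levI n E s j = (d : Int) := by
  have hd : d ∈ Finset.range (n + 1) := by
    have := lvl_lt_n hE hs h
    rw [Finset.mem_range]
    omega
  rw [levI]
  rw [Finset.sum_eq_single_of_mem d hd]
  · rw [if_pos h]
  · intro d' _ hne
    cases hx : lvlB n E s d' j
    · rw [if_neg]; exact Bool.noConfusion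
    · exact absurd (lvl_unique hx h) hne

lemma levI_zero {n : Nat} {E : List (Int × Int)} {s j : Nat}
    (h : ∀ d, lvlB n E s d j = false) : levI n E s j = 0 := by
  rw [levI]
  apply Finset.sum_eq_zero
  intro d _
  rw [h d]
  rfl

lemma reach_of_ball {n : Nat} {E : List (Int × Int)} {s : Nat} (hE : goodE n E)
    (hs : s < n) {d j : Nat} (h : ballB n E s d j = true) : ballB n E s n j = true := by
  obtain ⟨d', _, hl⟩ := ball_to_lvl h
  exact ball_le (le_of_lt (lvl_lt_n hE hs hl)) (lvl_ball hl)

lemma unreach_lvl {n : Nat} {E : List (Int × Int)} {s : Nat} (hE : goodE n E)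
    (hs : s < n) {j : Nat} (h : ballB n E s n j = false) :
    ∀ d, lvlB n E s d j = false := by
  intro d
  cases hx : lvlB n E s d j
  · rfl
  · rw [reach_of_ball hE hs (lvl_ball hx)] at h
    exact Bool.noConfusion h
-- membership characterization of A's adjacency lists
lemma pvGStep_eq (g : List (List Int)) (e : Int × Int) :
    pvGStep g e = PySem.List.pySetD
      (PySem.List.pySetD g e.1 (PySem.List.pyGetD g e.1 [] ++ [e.2])) e.2
      (PySem.List.pyGetD (PySem.List.pySetD g e.1 (PySem.List.pyGetD g e.1 [] ++ [e.2])) e.2 []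
        ++ [e.1]) := rfl

lemma pv_append_mem {n : Nat} {g' : List (List Int)} (u w : Int)
    (hg' : g'.length = n) (hu : pvGood n u) :
    ∀ p, p < n → ∀ x,
      (x ∈ (PySem.List.pySetD g' u (PySem.List.pyGetD g' u [] ++ [w])).getD p [] ↔
        x ∈ g'.getD p [] ∨ (pvIx n u = p ∧ x = w)) := by
  intro p hp x
  rw [pv_setD_good _ hg' hu, pv_getD_good [] hg' hu]
  by_cases hpu : pvIx n u = p
  · subst hpu
    have hlt : pvIx n u < g'.length := by rw [hg']; exact pvIx_lt hu
    rw [List.getD_eq_getElem?_getD, List.getElem?_set_self hlt]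
    simp only [Option.getD_some, List.mem_append, List.mem_singleton]
    rw [List.getD_eq_getElem?_getD, List.getElem?_eq_getElem hlt, Option.getD_some]
    tauto
  · rw [List.getD_eq_getElem?_getD, List.getElem?_set_ne hpu]
    rw [← List.getD_eq_getElem?_getD]
    tauto

lemma pvGStep_len {n : Nat} {g : List (List Int)} {e : Int × Int}
    (hg : g.length = n) (ha : pvGood n e.1) (hb : pvGood n e.2) :
    (pvGStep g e).length = n := by
  rw [pvGStep_eq]
  have h1 : (PySem.List.pySetD g e.1 (PySem.List.pyGetD g e.1 [] ++ [e.2])).length = n := by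
    rw [pv_setD_good _ hg ha]
    simpa using hg
  rw [pv_setD_good _ h1 hb]
  simpa using h1

lemma pvGStep_mem {n : Nat} {g : List (List Int)} {e : Int × Int}
    (hg : g.length = n) (ha : pvGood n e.1) (hb : pvGood n e.2) :
    ∀ p, p < n → ∀ x,
      (x ∈ (pvGStep g e).getD p [] ↔ x ∈ g.getD p [] ∨
        (pvIx n e.1 = p ∧ x = e.2) ∨ (pvIx n e.2 = p ∧ x = e.1)) := by
  intro p hp x
  rw [pvGStep_eq]
  have h1 : (PySem.List.pySetD g e.1 (PySem.List.pyGetD g e.1 [] ++ [e.2])).length = n := by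
    rw [pv_setD_good _ hg ha]
    simpa using hg
  rw [pv_append_mem e.2 e.1 h1 hb p hp x,
    pv_append_mem e.1 e.2 hg ha p hp x]
  tauto

lemma kbGraph_mem {N : Int} {edges : List (Int × Int)} (hN : 0 ≤ N)
    (hpre : Pre_find_kevin_bacon N edges) :
    ∀ p, p < (N + 1).toNat → ∀ x,
      (x ∈ (kbGraph N edges).getD p [] ↔
        ∃ e ∈ edges, (pvIx (N + 1).toNat e.1 = p ∧ x = e.2) ∨
          (pvIx (N + 1).toNat e.2 = p ∧ x = e.1)) := by
  have hn : (((N + 1).toNat : Int)) = N + 1 := Int.toNat_of_nonneg (by omega)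
  have hgen : ∀ (es : List (Int × Int)) (g0 : List (List Int)), g0.length = (N + 1).toNat →
      (∀ e ∈ es, pvGood (N + 1).toNat e.1 ∧ pvGood (N + 1).toNat e.2) →
      ∀ p, p < (N + 1).toNat → ∀ x,
      (x ∈ (es.foldl pvGStep g0).getD p [] ↔ x ∈ g0.getD p [] ∨
        ∃ e ∈ es, (pvIx (N + 1).toNat e.1 = p ∧ x = e.2) ∨ (pvIx (N + 1).toNat e.2 = p ∧ x = e.1)) := by
    intro es
    induction es with
    | nil => intro g0 hg0 _ p hp x; simp
    | cons e rest ih =>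
      intro g0 hg0 hgood p hp x
      obtain ⟨ha, hb⟩ := hgood e (by simp)
      simp only [List.foldl_cons]
      rw [ih (pvGStep g0 e) (pvGStep_len hg0 ha hb)
        (fun e' he' => hgood e' (by simp [he'])) p hp x,
        pvGStep_mem hg0 ha hb p hp x]
      constructor
      · rintro ((h | h) | h)
        · left; exact h
        · right; exact ⟨e, by simp, h⟩
        · obtain ⟨e', he', hcond⟩ := h
          right; exact ⟨e', by simp [he'], hcond⟩
      · rintro (h | ⟨e', he', hcond⟩)
        · left; left; exact h
        · rcases List.mem_cons.mp he' with he'' | he''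
          · subst he''; left; right; exact hcond
          · right; exact ⟨e', he'', hcond⟩
  intro p hp x
  have heq : kbGraph N edges = edges.foldl pvGStep (List.replicate (N + 1).toNat []) := rfl
  rw [heq, hgen edges (List.replicate (N + 1).toNat []) (by simp)
    (fun e he => by
      obtain ⟨⟨u1, u2⟩, u3, u4⟩ := hpre e he
      exact ⟨⟨by omega, by omega⟩, ⟨by omega, by omega⟩⟩) p hp x]
  have hrep : (List.replicate (N + 1).toNat ([] : List Int)).getD p [] = [] := by
    rw [List.getD_eq_getElem?_getD, List.getElem?_replicate]
    split <;> simp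
  rw [hrep]
  simp

-- characterization of one ghost wave: the fresh vertices collected
lemma expandNode_cons (v : List Bool) (q : List Int) (nb : Int) (rest : List Int) :
    expandNode v q (nb :: rest) =
      if PySem.List.pyGetD v nb true = false then
        expandNode (PySem.List.pySetD v nb true) (q ++ [nb]) rest
      else expandNode v q rest := rfl

lemma expandNode_char {n : Nat} :
    ∀ (l : List Int) (v : List Bool) (q : List Int),
    v.length = n → (∀ x ∈ l, pvGood n x) →
    ∃ new, (expandNode v q l).2 = q ++ new ∧
      (expandNode v q l).1.length = n ∧
      (∀ j, pvGb (expandNode v q l).1 j = (pvGb v j || l.any (fun x => pvIx n x == j))) ∧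
      (∀ x ∈ new, x ∈ l ∧ pvGb v (pvIx n x) = false) ∧
      (new.map (pvIx n)).Nodup ∧
      (∀ x ∈ l, pvGb v (pvIx n x) = false → pvIx n x ∈ new.map (pvIx n)) := by
  intro l
  induction l with
  | nil =>
    intro v q hv _
    exact ⟨[], by simp [expandNode], by simpa [expandNode] using hv,
      fun j => by simp [expandNode], by simp, by simp, by simp⟩
  | cons nb rest ih =>
    intro v q hv hgood
    have hnb : pvGood n nb := hgood nb (by simp)
    have hk : pvIx n nb < n := pvIx_lt hnb
    by_cases hg : PySem.List.pyGetD v nb true = false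
    · have hset : PySem.List.pySetD v nb true = v.set (pvIx n nb) true :=
        pv_setD_good true hv hnb
      have hread : pvGb v (pvIx n nb) = false := by
        rw [pv_getD_good true hv hnb] at hg
        have hkl : pvIx n nb < v.length := hv ▸ hk
        simpa [pvGb, List.getD_eq_getElem?_getD, List.getElem?_eq_getElem hkl] using hg
      obtain ⟨new, e1, e2, e3, e4, e5, e6⟩ :=
        ih (v.set (pvIx n nb) true) (q ++ [nb]) (by simpa using hv)
          (fun x hx => hgood x (by simp [hx]))
      rw [expandNode_cons, if_pos hg, hset]
      refine ⟨nb :: new, ?_, e2, ?_, ?_, ?_, ?_⟩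
      · rw [e1]; simp
      · intro j
        rw [e3 j]
        by_cases hj : j = pvIx n nb
        · subst hj
          rw [pvGb_set_self (hv ▸ hk) true]
          simp [hread]
        · rw [pvGb_set_ne hj]
          simp only [List.any_cons]
          have hne : (pvIx n nb == j) = false := by
            rw [beq_eq_false_iff_ne]
            omega
          rw [hne]
          simp [Bool.or_assoc]
      · intro x hx
        rcases List.mem_cons.mp hx with h | h
        · subst h; exact ⟨by simp, hread⟩
        · obtain ⟨hxl, hxf⟩ := e4 x h
          refine ⟨by simp [hxl], ?_⟩
          by_cases hxk : pvIx n x = pvIx n nb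
          · rw [hxk] at hxf
            rw [pvGb_set_self (hv ▸ hk) true] at hxf
            exact Bool.noConfusion hxf
          · rwa [pvGb_set_ne hxk] at hxf
      · simp only [List.map_cons, List.nodup_cons]
        refine ⟨?_, e5⟩
        intro hmem
        simp only [List.mem_map] at hmem
        obtain ⟨x, hx, hxe⟩ := hmem
        have := (e4 x hx).2
        rw [hxe, pvGb_set_self (hv ▸ hk) true] at this
        exact Bool.noConfusion this
      · intro x hx hxf
        rcases List.mem_cons.mp hx with h | h
        · subst h; simp
        · by_cases hxk : pvIx n x = pvIx n nb
          · rw [hxk]; simp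
          · have := e6 x h (by rwa [pvGb_set_ne hxk])
            simp only [List.map_cons, List.mem_cons]
            right; exact this
    · obtain ⟨new, e1, e2, e3, e4, e5, e6⟩ := ih v q hv (fun x hx => hgood x (by simp [hx]))
      have hread : pvGb v (pvIx n nb) = true := by
        rw [pv_getD_good true hv hnb] at hg
        have hkl : pvIx n nb < v.length := hv ▸ hk
        simp only [pvGb]
        simp only [List.getD_eq_getElem?_getD, List.getElem?_eq_getElem hkl,
          Option.getD_some] at hg ⊢
        cases hx : v[pvIx n nb] with
        | false => rw [hx] at hg; exact absurd rfl hg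
        | true => rfl
      rw [expandNode_cons, if_neg hg]
      refine ⟨new, e1, e2, ?_, ?_, e5, ?_⟩
      · intro j
        rw [e3 j]
        by_cases hj : j = pvIx n nb
        · subst hj
          simp [hread]
        · simp only [List.any_cons]
          have hne : (pvIx n nb == j) = false := by
            rw [beq_eq_false_iff_ne]
            omega
          rw [hne]
          simp
      · intro x hx
        obtain ⟨hxl, hxf⟩ := e4 x hx
        exact ⟨by simp [hxl], hxf⟩
      · intro x hx hxf
        rcases List.mem_cons.mp hx with h | h
        · subst h; rw [hread] at hxf; exact Bool.noConfusion hxf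
        · exact e6 x h hxf

lemma expandLevel_cons (g : List (List Int)) (v : List Bool) (q : List Int)
    (f : Int) (rest : List Int) :
    expandLevel g v q (f :: rest) =
      expandLevel g (expandNode v q (PySem.List.pyGetD g f [])).1
        (expandNode v q (PySem.List.pyGetD g f [])).2 rest := rfl

lemma expandLevel_char {n : Nat} {g : List (List Int)}
    (hg : g.length = n) (hrows : ∀ row ∈ g, ∀ x ∈ row, pvGood n x) :
    ∀ (F : List Int) (v : List Bool) (q : List Int),
    v.length = n → (∀ f ∈ F, pvGood n f) →
    ∃ new, (expandLevel g v q F).2 = q ++ new ∧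
      (expandLevel g v q F).1.length = n ∧
      (∀ j, pvGb (expandLevel g v q F).1 j =
        (pvGb v j || F.any (fun f => (PySem.List.pyGetD g f []).any (fun x => pvIx n x == j)))) ∧
      (∀ x ∈ new, pvGood n x ∧ pvGb v (pvIx n x) = false ∧
        ∃ f ∈ F, x ∈ PySem.List.pyGetD g f []) ∧
      (new.map (pvIx n)).Nodup ∧
      (∀ j, pvGb v j = false →
        F.any (fun f => (PySem.List.pyGetD g f []).any (fun x => pvIx n x == j)) = true →
        j ∈ new.map (pvIx n)) := by
  intro F
  induction F with
  | nil =>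
    intro v q hv _
    exact ⟨[], by simp [expandLevel], by simpa [expandLevel] using hv,
      fun j => by simp [expandLevel], by simp, by simp, by simp⟩
  | cons f rest ih =>
    intro v q hv hF
    have hf : pvGood n f := hF f (by simp)
    have hrow : ∀ x ∈ PySem.List.pyGetD g f [], pvGood n x := by
      intro x hx
      have hlt : pvIx n f < g.length := by rw [hg]; exact pvIx_lt hf
      rw [pv_getD_good [] hg hf, List.getD_eq_getElem _ _ hlt] at hx
      exact hrows _ (List.getElem_mem _) x hx
    obtain ⟨new1, a1, a2, a3, a4, a5, a6⟩ :=
      expandNode_char (PySem.List.pyGetD g f []) v q hv hrow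
    obtain ⟨new2, b1, b2, b3, b4, b5, b6⟩ :=
      ih (expandNode v q (PySem.List.pyGetD g f [])).1
        (expandNode v q (PySem.List.pyGetD g f [])).2 a2
        (fun f' hf' => hF f' (by simp [hf']))
    rw [expandLevel_cons]
    refine ⟨new1 ++ new2, ?_, b2, ?_, ?_, ?_, ?_⟩
    · rw [b1, a1]
      simp [List.append_assoc]
    · intro j
      rw [b3 j, a3 j]
      simp only [List.any_cons]
      simp [Bool.or_assoc]
    · intro x hx
      rcases List.mem_append.mp hx with h | h
      · obtain ⟨hxl, hxf⟩ := a4 x h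
        exact ⟨hrow x hxl, hxf, f, by simp, hxl⟩
      · obtain ⟨hgx, hxf, f', hf', hxl⟩ := b4 x h
        have horig : pvGb v (pvIx n x) = false := by
          have := a3 (pvIx n x)
          rw [hxf] at this
          rcases Bool.or_eq_false_iff.mp this.symm with ⟨h1, _⟩
          exact h1
        exact ⟨hgx, horig, f', by simp [hf'], hxl⟩
    · rw [List.map_append]
      rw [List.nodup_append]
      refine ⟨a5, b5, ?_⟩
      intro a ha b hb heq
      obtain ⟨x1, hx1, he1⟩ := List.mem_map.mp ha
      obtain ⟨x2, hx2, he2⟩ := List.mem_map.mp hb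
      have hm1 : pvGb (expandNode v q (PySem.List.pyGetD g f [])).1 (pvIx n x1) = true := by
        rw [a3]
        have hany : (PySem.List.pyGetD g f []).any (fun x => pvIx n x == pvIx n x1) = true :=
          List.any_eq_true.mpr ⟨x1, (a4 x1 hx1).1, by simp⟩
        rw [hany]
        simp
      have hm2 := (b4 x2 hx2).2.1
      rw [he2, ← heq, ← he1] at hm2
      rw [hm1] at hm2
      exact Bool.noConfusion hm2
    · intro j hj hany
      simp only [List.any_cons] at hany
      rcases Bool.or_eq_true_iff.mp hany with h1 | h1
      · obtain ⟨x, hx, hxe⟩ := List.any_eq_true.mp h1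
        have hxe' : pvIx n x = j := by simpa using hxe
        have := a6 x hx (by rwa [hxe'])
        rw [hxe'] at this
        rw [List.map_append]
        exact List.mem_append.mpr (Or.inl this)
      · by_cases hmid : pvGb (expandNode v q (PySem.List.pyGetD g f [])).1 j = false
        · have := b6 j hmid h1
          rw [List.map_append]
          exact List.mem_append.mpr (Or.inr this)
        · -- j got marked by the first node: it is in new1
          have hmid' : pvGb (expandNode v q (PySem.List.pyGetD g f [])).1 j = true := by
            cases hx : pvGb (expandNode v q (PySem.List.pyGetD g f [])).1 j
            · exact absurd hx hmid
            · rfl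
          rw [a3 j, hj] at hmid'
          simp only [Bool.false_or] at hmid'
          obtain ⟨x, hx, hxe⟩ := List.any_eq_true.mp hmid'
          have hxe' : pvIx n x = j := by simpa using hxe
          have := a6 x hx (by rwa [hxe'])
          rw [hxe'] at this
          rw [List.map_append]
          exact List.mem_append.mpr (Or.inl this)
-- ===== B-side: Bellman-Ford invariants =====

def bfInv (n : Nat) (E : List (Int × Int)) (s : Nat) (D : List Int) : Prop :=
  D.length = n ∧
  (∀ d j, lvlB n E s d j = true → (d : Int) ≤ pvGi D j) ∧
  (∀ j, j < n → pvGi D j ≤ (n : Int)) ∧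
  (∀ j, j < n → pvGi D j < (n : Int) → ballB n E s n j = true) ∧
  pvGi D s ≤ 0

-- one directed half of the port's per-edge relaxation, on the vector alone
def rxHalf (D : List Int) (i j : Int) : List Int :=
  if PySem.List.pyGetD D i 0 + 1 < PySem.List.pyGetD D j 0 then
    PySem.List.pySetD D j (PySem.List.pyGetD D i 0 + 1)
  else D

lemma rxFwd_fst (st : List Int × Bool) (e : Int × Int) :
    (rxFwd st e).1 = rxHalf st.1 e.1 e.2 := by
  unfold rxFwd rxHalf
  split <;> rfl

lemma rxBwd_fst (st : List Int × Bool) (e : Int × Int) :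
    (rxBwd st e).1 = rxHalf st.1 e.2 e.1 := by
  unfold rxBwd rxHalf
  split <;> rfl

lemma rxStep_fst (st : List Int × Bool) (e : Int × Int) :
    (rxStep st e).1 = rxHalf (rxHalf st.1 e.1 e.2) e.2 e.1 := by
  unfold rxStep
  rw [rxBwd_fst, rxFwd_fst]

lemma pyGetD_eq_pvGi {n : Nat} {D : List Int} {i : Int} (hD : D.length = n)
    (hi : pvGood n i) : PySem.List.pyGetD D i 0 = pvGi D (pvIx n i) := by
  rw [pv_getD_good 0 hD hi]
  rfl

lemma rxHalf_len {n : Nat} {D : List Int} {i j : Int} (hD : D.length = n)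
    (hi : pvGood n i) (hj : pvGood n j) : (rxHalf D i j).length = n := by
  unfold rxHalf
  split
  · rw [pv_setD_good _ hD hj]; simpa using hD
  · exact hD

lemma rxHalf_get {n : Nat} {D : List Int} {i j : Int} (hD : D.length = n)
    (hi : pvGood n i) (hj : pvGood n j) (k : Nat) :
    pvGi (rxHalf D i j) k = pvGi D k ∨
      (k = pvIx n j ∧ pvGi (rxHalf D i j) k = pvGi D (pvIx n i) + 1 ∧
        pvGi (rxHalf D i j) k < pvGi D k) := by
  unfold rxHalf
  rw [pyGetD_eq_pvGi hD hi, pyGetD_eq_pvGi hD hj]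
  split
  · rename_i hcond
    rw [pv_setD_good _ hD hj]
    by_cases hk : k = pvIx n j
    · subst hk
      right
      have hlt : pvIx n j < D.length := by rw [hD]; exact pvIx_lt hj
      rw [pvGi_set_self hlt]
      exact ⟨rfl, rfl, hcond⟩
    · left; exact pvGi_set_ne hk _
  · left; rfl

lemma rxHalf_mono {n : Nat} {D : List Int} {i j : Int} (hD : D.length = n)
    (hi : pvGood n i) (hj : pvGood n j) (k : Nat) :
    pvGi (rxHalf D i j) k ≤ pvGi D k := by
  rcases rxHalf_get hD hi hj k with h | ⟨_, _, h⟩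
  · exact le_of_eq h
  · exact le_of_lt h

lemma rxHalf_rel {n : Nat} {D : List Int} {i j : Int} (hD : D.length = n)
    (hi : pvGood n i) (hj : pvGood n j) :
    pvGi (rxHalf D i j) (pvIx n j) ≤ pvGi D (pvIx n i) + 1 := by
  unfold rxHalf
  rw [pyGetD_eq_pvGi hD hi, pyGetD_eq_pvGi hD hj]
  split
  · rename_i hcond
    rw [pv_setD_good _ hD hj]
    have hlt : pvIx n j < D.length := by rw [hD]; exact pvIx_lt hj
    rw [pvGi_set_self hlt]
  · rename_i hcond
    omega

-- adjacency step inside the reachable set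
lemma ball_step {n : Nat} {E : List (Int × Int)} {s : Nat} (hE : goodE n E) (hs : s < n)
    {p q : Nat} (hb : ballB n E s n p = true) (hadj : adjB n E p q = true) :
    ballB n E s n q = true := by
  have hp : p < n := (adj_lt hE hadj).1
  exact reach_of_ball hE hs (ball_of_lvl_adj hp hb hadj)

-- level bound across one edge
lemma lvl_adj_bound {n : Nat} {E : List (Int × Int)} {s : Nat} (hE : goodE n E)
    (hs : s < n) {p q dp dq : Nat} (hp : lvlB n E s dp p = true)
    (hq : lvlB n E s dq q = true) (hadj : adjB n E p q = true) : dq ≤ dp + 1 := by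
  have hpn : p < n := (adj_lt hE hadj).1
  have hball : ballB n E s (dp + 1) q = true := ball_of_lvl_adj hpn (lvl_ball hp) hadj
  by_contra hgt
  push_neg at hgt
  have := lvl_not_ball_lt (show dp + 1 < dq by omega) hq
  rw [hball] at this
  exact Bool.noConfusion this

lemma rxHalf_inv {n : Nat} {E : List (Int × Int)} {s : Nat} (hE : goodE n E) (hs : s < n)
    {D : List Int} {i j : Int} (hi : pvGood n i) (hj : pvGood n j)
    (hadj : adjB n E (pvIx n i) (pvIx n j) = true)
    (h : bfInv n E s D) : bfInv n E s (rxHalf D i j) := by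
  obtain ⟨hlen, hlo, hhi, hfin, hds⟩ := h
  refine ⟨rxHalf_len hlen hi hj, ?_, ?_, ?_, ?_⟩
  · intro d k hk
    rcases rxHalf_get hlen hi hj k with hsame | ⟨hkj, hval, _⟩
    · rw [hsame]; exact hlo d k hk
    · subst hkj
      rw [hval]
      by_cases hreach : ballB n E s n (pvIx n i) = true
      · obtain ⟨dp, _, hlp⟩ := ball_to_lvl hreach
        have hb1 := hlo dp (pvIx n i) hlp
        have hb2 := lvl_adj_bound hE hs hlp hk hadj
        have : ((d : Int)) ≤ (dp : Int) + 1 := by exact_mod_cast hb2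
        omega
      · have hni := pvIx_lt hi
        have hDi : ¬(pvGi D (pvIx n i) < (n : Int)) := fun hc => hreach (hfin _ hni hc)
        have hd := lvl_lt_n hE hs hk
        have : ((d : Int)) < (n : Int) := by exact_mod_cast hd
        omega
  · intro k hkn
    rcases rxHalf_get hlen hi hj k with hsame | ⟨hkj, _, hlt⟩
    · rw [hsame]; exact hhi k hkn
    · exact le_of_lt (lt_of_lt_of_le hlt (hhi k hkn))
  · intro k hkn hfinite
    rcases rxHalf_get hlen hi hj k with hsame | ⟨hkj, hval, _⟩
    · rw [hsame] at hfinite; exact hfin k hkn hfinite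
    · subst hkj
      rw [hval] at hfinite
      have hni := pvIx_lt hi
      have : pvGi D (pvIx n i) < (n : Int) := by omega
      have hreach := hfin _ hni this
      exact ball_step hE hs hreach hadj
  · exact le_trans (rxHalf_mono hlen hi hj s) hds

lemma rx_inv {n : Nat} {E : List (Int × Int)} {s : Nat} (hE : goodE n E) (hs : s < n)
    {st : List Int × Bool} {e : Int × Int} (he : e ∈ E)
    (h : bfInv n E s st.1) : bfInv n E s (rxStep st e).1 := by
  obtain ⟨h1, h2⟩ := hE e he
  obtain ⟨ha1, ha2⟩ := adj_of_edge (n := n) he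
  rw [rxStep_fst]
  exact rxHalf_inv hE hs h2 h1 ha2 (rxHalf_inv hE hs h1 h2 ha1 h)

lemma rx_mono {n : Nat} {st : List Int × Bool} {e : Int × Int}
    (hlen : st.1.length = n) (h1 : pvGood n e.1) (h2 : pvGood n e.2) (k : Nat) :
    pvGi (rxStep st e).1 k ≤ pvGi st.1 k := by
  rw [rxStep_fst]
  have hl1 : (rxHalf st.1 e.1 e.2).length = n := rxHalf_len hlen h1 h2
  exact le_trans (rxHalf_mono hl1 h2 h1 k) (rxHalf_mono hlen h1 h2 k)

lemma rx_len {n : Nat} {st : List Int × Bool} {e : Int × Int}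
    (hlen : st.1.length = n) (h1 : pvGood n e.1) (h2 : pvGood n e.2) :
    (rxStep st e).1.length = n := by
  rw [rxStep_fst]
  exact rxHalf_len (rxHalf_len hlen h1 h2) h2 h1

lemma rx_rel {n : Nat} {st : List Int × Bool} {e : Int × Int}
    (hlen : st.1.length = n) (h1 : pvGood n e.1) (h2 : pvGood n e.2) :
    pvGi (rxStep st e).1 (pvIx n e.2) ≤ pvGi st.1 (pvIx n e.1) + 1 ∧
    pvGi (rxStep st e).1 (pvIx n e.1) ≤ pvGi st.1 (pvIx n e.2) + 1 := by
  rw [rxStep_fst]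
  have hl1 : (rxHalf st.1 e.1 e.2).length = n := rxHalf_len hlen h1 h2
  constructor
  · exact le_trans (rxHalf_mono hl1 h2 h1 (pvIx n e.2)) (rxHalf_rel hlen h1 h2)
  · refine le_trans (rxHalf_rel hl1 h2 h1) ?_
    have := rxHalf_mono hlen h1 h2 (pvIx n e.2)
    omega

lemma rxFwd_flag_mono {st : List Int × Bool} {e : Int × Int} (h : st.2 = true) :
    (rxFwd st e).2 = true := by
  unfold rxFwd
  split
  · rfl
  · exact h

lemma rxBwd_flag_mono {st : List Int × Bool} {e : Int × Int} (h : st.2 = true) :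
    (rxBwd st e).2 = true := by
  unfold rxBwd
  split
  · rfl
  · exact h

lemma rx_flag_mono {st : List Int × Bool} {e : Int × Int} (h : st.2 = true) :
    (rxStep st e).2 = true := by
  unfold rxStep
  exact rxBwd_flag_mono (rxFwd_flag_mono h)

lemma rxFwd_no_change {st : List Int × Bool} {e : Int × Int}
    (h : (rxFwd st e).2 = st.2) (hst : st.2 = false) : rxFwd st e = st := by
  by_cases hc : PySem.List.pyGetD st.1 e.1 0 + 1 < PySem.List.pyGetD st.1 e.2 0
  · exfalso
    unfold rxFwd at h
    rw [if_pos hc] at h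
    rw [hst] at h
    exact Bool.noConfusion h
  · unfold rxFwd
    rw [if_neg hc]

lemma rxBwd_no_change {st : List Int × Bool} {e : Int × Int}
    (h : (rxBwd st e).2 = st.2) (hst : st.2 = false) : rxBwd st e = st := by
  by_cases hc : PySem.List.pyGetD st.1 e.2 0 + 1 < PySem.List.pyGetD st.1 e.1 0
  · exfalso
    unfold rxBwd at h
    rw [if_pos hc] at h
    rw [hst] at h
    exact Bool.noConfusion h
  · unfold rxBwd
    rw [if_neg hc]

lemma rx_no_change {D : List Int} {e : Int × Int} (h : (rxStep (D, false) e).2 = false) :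
    rxStep (D, false) e = (D, false) := by
  have hfwd : (rxFwd (D, false) e).2 = false := by
    cases hx : (rxFwd (D, false) e).2
    · rfl
    · have : (rxStep (D, false) e).2 = true := by
        unfold rxStep
        exact rxBwd_flag_mono hx
      rw [this] at h; exact Bool.noConfusion h
  have h1 : rxFwd (D, false) e = (D, false) := rxFwd_no_change hfwd rfl
  have hbwd : (rxBwd (D, false) e).2 = false := by
    unfold rxStep at h
    rw [h1] at h
    exact h
  have h2 : rxBwd (D, false) e = (D, false) := rxBwd_no_change hbwd rfl
  unfold rxStep
  rw [h1, h2]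

-- fixpoint of one edge: both direction inequalities hold
lemma rx_fix_ineq {n : Nat} {D : List Int} {e : Int × Int} (hlen : D.length = n)
    (h1 : pvGood n e.1) (h2 : pvGood n e.2)
    (hfix : rxStep (D, false) e = (D, false)) :
    pvGi D (pvIx n e.2) ≤ pvGi D (pvIx n e.1) + 1 ∧
    pvGi D (pvIx n e.1) ≤ pvGi D (pvIx n e.2) + 1 := by
  have hflag : (rxStep (D, false) e).2 = false := by rw [hfix]
  have hfwd : (rxFwd (D, false) e).2 = false := by
    cases hx : (rxFwd (D, false) e).2
    · rfl
    · have : (rxStep (D, false) e).2 = true := by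
        unfold rxStep
        exact rxBwd_flag_mono hx
      rw [this] at hflag; exact Bool.noConfusion hflag
  have hf1 : rxFwd (D, false) e = (D, false) := rxFwd_no_change hfwd rfl
  have hc1 : ¬(PySem.List.pyGetD D e.1 0 + 1 < PySem.List.pyGetD D e.2 0) := by
    intro hc
    have : (rxFwd (D, false) e).2 = true := by
      unfold rxFwd
      rw [if_pos hc]
    rw [hf1] at this
    exact Bool.noConfusion this
  have hbwd : (rxBwd (D, false) e).2 = false := by
    have : rxStep (D, false) e = rxBwd (D, false) e := by
      unfold rxStep
      rw [hf1]
    rw [← this, hflag]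
  have hc2 : ¬(PySem.List.pyGetD D e.2 0 + 1 < PySem.List.pyGetD D e.1 0) := by
    intro hc
    have : (rxBwd (D, false) e).2 = true := by
      unfold rxBwd
      rw [if_pos hc]
    rw [hbwd] at this
    exact Bool.noConfusion this
  rw [pyGetD_eq_pvGi hlen h1, pyGetD_eq_pvGi hlen h2] at hc1 hc2
  omega

-- fold-level lemmas over a sub-list of edges
lemma fold_flag_mono : ∀ (l : List (Int × Int)) (st : List Int × Bool), st.2 = true →
    (l.foldl rxStep st).2 = true := by
  intro l
  induction l with
  | nil => intro st h; exact h
  | cons e rest ih =>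
    intro st h
    simp only [List.foldl_cons]
    exact ih _ (rx_flag_mono h)

lemma fold_mono {n : Nat} : ∀ (l : List (Int × Int)) (st : List Int × Bool),
    goodE n l → st.1.length = n →
    ∀ k, pvGi (l.foldl rxStep st).1 k ≤ pvGi st.1 k := by
  intro l
  induction l with
  | nil => intro st _ _ k; exact le_refl _
  | cons e rest ih =>
    intro st hg h k
    obtain ⟨h1, h2⟩ := hg e (by simp)
    simp only [List.foldl_cons]
    exact le_trans (ih _ (fun e' he' => hg e' (by simp [he'])) (rx_len h h1 h2) k)
      (rx_mono h h1 h2 k)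

lemma fold_inv {n : Nat} {E : List (Int × Int)} {s : Nat} (hE : goodE n E) (hs : s < n) :
    ∀ (l : List (Int × Int)) (st : List Int × Bool), (∀ e ∈ l, e ∈ E) →
    bfInv n E s st.1 → bfInv n E s (l.foldl rxStep st).1 := by
  intro l
  induction l with
  | nil => intro st _ h; exact h
  | cons e rest ih =>
    intro st hsub h
    simp only [List.foldl_cons]
    exact ih _ (fun e' he' => hsub e' (by simp [he']))
      (rx_inv hE hs (hsub e (by simp)) h)

lemma fold_reaches {n : Nat} {r : Int} {p q : Nat} :
    ∀ (l : List (Int × Int)) (st : List Int × Bool), goodE n l → st.1.length = n →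
    (∃ e ∈ l, (pvIx n e.1 = p ∧ pvIx n e.2 = q) ∨ (pvIx n e.2 = p ∧ pvIx n e.1 = q)) →
    pvGi st.1 p ≤ r → pvGi (l.foldl rxStep st).1 q ≤ r + 1 := by
  intro l
  induction l with
  | nil => intro st _ _ hw _; simp at hw
  | cons e rest ih =>
    intro st hg hlen hw hp
    obtain ⟨h1, h2⟩ := hg e (by simp)
    have hg' : goodE n rest := fun e' he' => hg e' (by simp [he'])
    have hlen' : (rxStep st e).1.length = n := rx_len hlen h1 h2
    simp only [List.foldl_cons]
    obtain ⟨e', he', hor⟩ := hw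
    rcases List.mem_cons.mp he' with heq | hmem
    · subst heq
      have hrel := rx_rel hlen h1 h2
      have hq : pvGi (rxStep st e').1 q ≤ r + 1 := by
        rcases hor with ⟨hp1, hq1⟩ | ⟨hp1, hq1⟩
        · rw [← hq1]; rw [← hp1] at hp; omega
        · rw [← hq1]; rw [← hp1] at hp; omega
      exact le_trans (fold_mono rest _ hg' hlen' q) hq
    · have hp' : pvGi (rxStep st e).1 p ≤ r :=
        le_trans (rx_mono hlen h1 h2 p) hp
      exact ih _ hg' hlen' ⟨e', hmem, hor⟩ hp'

def bfUp (n : Nat) (E : List (Int × Int)) (s : Nat) (t : Nat) (D : List Int) : Prop :=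
  ∀ d j, lvlB n E s d j = true → d ≤ t → pvGi D j ≤ (d : Int)

lemma fold_upper {n : Nat} {E : List (Int × Int)} {s : Nat} (hE : goodE n E) (hs : s < n)
    {D : List Int} {c : Bool} {t : Nat} (hD : D.length = n) (hup : bfUp n E s t D) :
    bfUp n E s (t + 1) (E.foldl rxStep (D, c)).1 := by
  intro d j hj hd
  rcases Nat.lt_or_ge d (t + 1) with hlt | hge
  · exact le_trans (fold_mono E (D, c) hE hD j) (hup d j hj (by omega))
  · have hdt : d = t + 1 := by omega
    subst hdt
    have hball : ballB n E s (t + 1) j = true := lvl_ball hj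
    have hnot : ballB n E s t j = false := lvl_not_ball_lt (by omega) hj
    rw [ball_succ_via_lvl hE hs t j] at hball
    rcases Bool.or_eq_true_iff.mp hball with h1 | h1
    · rw [h1] at hnot; exact Bool.noConfusion hnot
    · obtain ⟨p, _, hc⟩ := List.any_eq_true.mp h1
      obtain ⟨c1, c2⟩ := Bool.and_eq_true_iff.mp hc
      have hedge := adj_edge_exists c2
      have hDp : pvGi D p ≤ (t : Int) := hup t p c1 (le_refl t)
      have hgoal := fold_reaches E (D, c) hE hD hedge hDp
      have hcast : ((t + 1 : Nat) : Int) = (t : Int) + 1 := by push_cast; ring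
      rw [hcast]
      exact hgoal

lemma fold_no_change : ∀ (l : List (Int × Int)) (D : List Int),
    (l.foldl rxStep (D, false)).2 = false →
    ((∀ e ∈ l, rxStep (D, false) e = (D, false)) ∧ l.foldl rxStep (D, false) = (D, false)) := by
  intro l
  induction l with
  | nil => intro D _; exact ⟨by simp, rfl⟩
  | cons e rest ih =>
    intro D h
    simp only [List.foldl_cons] at h ⊢
    have hflag : (rxStep (D, false) e).2 = false := by
      by_cases hc : (rxStep (D, false) e).2 = true
      · rw [fold_flag_mono rest _ hc] at h
        exact Bool.noConfusion h
      · cases hx : (rxStep (D, false) e).2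
        · rfl
        · exact absurd hx hc
    have heq := rx_no_change hflag
    rw [heq] at h ⊢
    obtain ⟨ha, hb⟩ := ih D h
    refine ⟨?_, hb⟩
    intro e' he'
    rcases List.mem_cons.mp he' with h' | h'
    · subst h'; exact heq
    · exact ha e' h'

lemma fix_exact {n : Nat} {E : List (Int × Int)} {s : Nat} (hE : goodE n E) (hs : s < n)
    {D : List Int} (hD : bfInv n E s D)
    (hfix : ∀ e ∈ E, rxStep (D, false) e = (D, false)) :
    ∀ d j, lvlB n E s d j = true → pvGi D j ≤ (d : Int) := by
  obtain ⟨hlen, hlo, hhi, hfin, hds⟩ := hD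
  intro d
  induction d with
  | zero =>
    intro j hj
    have := lvlB_zero_eq hj
    subst this
    simpa using hds
  | succ d ih =>
    intro j hj
    have hball : ballB n E s (d + 1) j = true := lvl_ball hj
    have hnot : ballB n E s d j = false := lvl_not_ball_lt (by omega) hj
    rw [ball_succ_via_lvl hE hs d j] at hball
    rcases Bool.or_eq_true_iff.mp hball with h1 | h1
    · rw [h1] at hnot; exact Bool.noConfusion hnot
    · obtain ⟨p, _, hc⟩ := List.any_eq_true.mp h1
      obtain ⟨c1, c2⟩ := Bool.and_eq_true_iff.mp hc
      obtain ⟨e, he, hor⟩ := adj_edge_exists c2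
      obtain ⟨h1', h2'⟩ := hE e he
      have hineq := rx_fix_ineq hlen h1' h2' (hfix e he)
      have hp := ih p c1
      have hcast : ((d + 1 : Nat) : Int) = (d : Int) + 1 := by push_cast; ring
      rw [hcast]
      rcases hor with ⟨hp1, hq1⟩ | ⟨hp1, hq1⟩
      · rw [hp1, hq1] at hineq
        omega
      · rw [hp1, hq1] at hineq
        omega

-- the final distance vector carries exactly the levels ((n:Int) as the INF sentinel)
def bfFinal (n : Nat) (E : List (Int × Int)) (s : Nat) (D : List Int) : Prop :=
  D.length = n ∧ ∀ j, j < n →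
    (ballB n E s n j = true → pvGi D j = levI n E s j) ∧
    (ballB n E s n j = false → pvGi D j = (n : Int))

lemma final_of_upper {n : Nat} {E : List (Int × Int)} {s : Nat} (hE : goodE n E)
    (hs : s < n) {D : List Int} (hD : bfInv n E s D)
    (hup : ∀ d j, lvlB n E s d j = true → pvGi D j ≤ (d : Int)) :
    bfFinal n E s D := by
  obtain ⟨hlen, hlo, hhi, hfin, hds⟩ := hD
  refine ⟨hlen, ?_⟩
  intro j hj
  constructor
  · intro hreach
    obtain ⟨d, _, hl⟩ := ball_to_lvl hreach
    rw [levI_eq hE hs hl]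
    have ha := hlo d j hl
    have hb := hup d j hl
    omega
  · intro hunreach
    have h1 := hhi j hj
    have h2 : ¬(pvGi D j < (n : Int)) := by
      intro hc
      rw [hfin j hj hc] at hunreach
      exact Bool.noConfusion hunreach
    omega

lemma bfRounds_cons (E : List (Int × Int)) (D : List Int) (r : Nat) :
    bfRounds E D (r + 1) =
      (if (E.foldl rxStep (D, false)).2 then bfRounds E (E.foldl rxStep (D, false)).1 r
       else (E.foldl rxStep (D, false)).1) := rfl

lemma bfRounds_final {n : Nat} {E : List (Int × Int)} {s : Nat} (hE : goodE n E)
    (hs : s < n) :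
    ∀ (r t : Nat) (D : List Int), bfInv n E s D → bfUp n E s t D → t + r = n - 1 →
    bfFinal n E s (bfRounds E D r) := by
  intro r
  induction r with
  | zero =>
    intro t D hinv hup ht
    show bfFinal n E s D
    refine final_of_upper hE hs hinv ?_
    intro d j hl
    have hd := lvl_lt_n hE hs hl
    exact hup d j hl (by omega)
  | succ r ih =>
    intro t D hinv hup ht
    rw [bfRounds_cons]
    by_cases hflag : (E.foldl rxStep (D, false)).2 = true
    · rw [if_pos hflag]
      exact ih (t + 1) _ (fold_inv hE hs E (D, false) (fun _ h => h) hinv)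
        (fold_upper hE hs hinv.1 hup) (by omega)
    · have hflag' : (E.foldl rxStep (D, false)).2 = false := by
        cases hx : (E.foldl rxStep (D, false)).2
        · rfl
        · exact absurd hx hflag
      rw [if_neg hflag]
      obtain ⟨hall, heq⟩ := fold_no_change E D hflag'
      rw [heq]
      show bfFinal n E s D
      exact final_of_upper hE hs hinv (fix_exact hE hs hinv hall)

-- the filtered sum of a list as a positional sum
lemma filter_lt_sum (c : Int) :
    ∀ (L : List Int), (L.filter (fun x => x < c)).sum =
      ∑ j ∈ Finset.range L.length, (if L.getD j 0 < c then L.getD j 0 else 0) := by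
  intro L
  induction L with
  | nil => simp
  | cons a L ih =>
    simp only [List.length_cons]
    rw [Finset.sum_range_succ']
    have hz : ∀ j, (a :: L).getD (j + 1) 0 = L.getD j 0 := by intro j; simp
    have h0 : (a :: L).getD 0 0 = a := by simp
    simp only [hz, h0]
    rw [← ih]
    by_cases hp : a < c
    · rw [List.filter_cons_of_pos (by simpa using hp), List.sum_cons, if_pos hp]
      ring
    · rw [List.filter_cons_of_neg (by simpa using hp), if_neg hp, add_zero]
-- ===== the wave recursion sums the levels that are still unvisited =====

lemma range_any_iff {n : Nat} {E : List (Int × Int)} {s d j : Nat} :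
    ((List.range n).any (fun p => lvlB n E s d p && adjB n E p j) = true) ↔
      (∃ p, p < n ∧ lvlB n E s d p = true ∧ adjB n E p j = true) := by
  rw [List.any_eq_true]
  constructor
  · rintro ⟨p, hp, hc⟩
    obtain ⟨c1, c2⟩ := Bool.and_eq_true_iff.mp hc
    exact ⟨p, List.mem_range.mp hp, c1, c2⟩
  · rintro ⟨p, hp, c1, c2⟩
    refine ⟨p, List.mem_range.mpr hp, ?_⟩
    rw [c1, c2]
    rfl

lemma frontier_adj {n : Nat} {E : List (Int × Int)} {s : Nat} {g : List (List Int)}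
    (hg : g.length = n)
    (hchar : ∀ p, p < n → ∀ x,
      (x ∈ g.getD p [] ↔ ∃ e ∈ E, (pvIx n e.1 = p ∧ x = e.2) ∨ (pvIx n e.2 = p ∧ x = e.1)))
    {d : Nat} {F : List Int} (hFg : ∀ f ∈ F, pvGood n f)
    (hFmem : ∀ j, j ∈ F.map (pvIx n) ↔ lvlB n E s d j = true) (j : Nat) :
    (F.any (fun f => (PySem.List.pyGetD g f []).any (fun x => pvIx n x == j)) = true) ↔
      (∃ p, p < n ∧ lvlB n E s d p = true ∧ adjB n E p j = true) := by
  constructor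
  · intro h
    obtain ⟨f, hf, hrow⟩ := List.any_eq_true.mp h
    obtain ⟨x, hx, hxe⟩ := List.any_eq_true.mp hrow
    have hxe' : pvIx n x = j := beq_iff_eq.mp hxe
    have hgf : pvGood n f := hFg f hf
    have hp : pvIx n f < n := pvIx_lt hgf
    rw [pv_getD_good [] hg hgf] at hx
    refine ⟨pvIx n f, hp, (hFmem (pvIx n f)).mp (List.mem_map.mpr ⟨f, hf, rfl⟩), ?_⟩
    obtain ⟨e, he, hor⟩ := (hchar (pvIx n f) hp x).mp hx
    rcases hor with ⟨hh1, hh2⟩ | ⟨hh1, hh2⟩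
    · refine List.any_eq_true.mpr ⟨e, he, ?_⟩
      subst hh2
      rw [Bool.or_eq_true_iff]
      left
      rw [Bool.and_eq_true_iff]
      constructor
      · rw [beq_iff_eq]; exact hh1
      · rw [beq_iff_eq]; exact hxe'
    · refine List.any_eq_true.mpr ⟨e, he, ?_⟩
      subst hh2
      rw [Bool.or_eq_true_iff]
      right
      rw [Bool.and_eq_true_iff]
      constructor
      · rw [beq_iff_eq]; exact hh1
      · rw [beq_iff_eq]; exact hxe'
  · rintro ⟨p, hp, hlvl, hadj⟩
    obtain ⟨f, hf, hfp⟩ := List.mem_map.mp ((hFmem p).mpr hlvl)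
    have hgf : pvGood n f := hFg f hf
    obtain ⟨e, he, hor⟩ := adj_edge_exists hadj
    refine List.any_eq_true.mpr ⟨f, hf, ?_⟩
    rw [pv_getD_good [] hg hgf, hfp]
    rcases hor with ⟨hh1, hh2⟩ | ⟨hh1, hh2⟩
    · refine List.any_eq_true.mpr ⟨e.2, ?_, by rw [beq_iff_eq]; exact hh2⟩
      exact (hchar p hp e.2).mpr ⟨e, he, Or.inl ⟨hh1, rfl⟩⟩
    · refine List.any_eq_true.mpr ⟨e.1, ?_, by rw [beq_iff_eq]; exact hh2⟩
      exact (hchar p hp e.1).mpr ⟨e, he, Or.inr ⟨hh1, rfl⟩⟩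

lemma levelLoop_cons (g : List (List Int)) (v : List Bool) (f0 : Int) (F : List Int)
    (depth total : Int) :
    levelLoop g v (f0 :: F) depth total =
      levelLoop g (expandLevel g v [] (f0 :: F)).1 (expandLevel g v [] (f0 :: F)).2
        (depth + 1)
        (total + (depth + 1) * (((expandLevel g v [] (f0 :: F)).2.length : Nat) : Int)) := by
  rw [levelLoop]

lemma wave_sum {n : Nat} {E : List (Int × Int)} {s : Nat} {g : List (List Int)}
    (hE : goodE n E) (hs : s < n) (hg : g.length = n)
    (hrows : ∀ row ∈ g, ∀ x ∈ row, pvGood n x)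
    (hchar : ∀ p, p < n → ∀ x,
      (x ∈ g.getD p [] ↔ ∃ e ∈ E, (pvIx n e.1 = p ∧ x = e.2) ∨ (pvIx n e.2 = p ∧ x = e.1))) :
    ∀ (k d : Nat) (v : List Bool) (F : List Int) (acc : Int),
    n + 1 - d ≤ k → d ≤ n → v.length = n →
    (∀ j, pvGb v j = ballB n E s d j) →
    (∀ f ∈ F, pvGood n f) →
    (F.map (pvIx n)).Nodup →
    (∀ j, j ∈ F.map (pvIx n) ↔ lvlB n E s d j = true) →
    levelLoop g v F (d : Int) acc =
      acc + ∑ j ∈ (Finset.range n).filter (fun j => ballB n E s d j = false), levI n E s j := by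
  intro k
  induction k with
  | zero =>
    intro d v F acc hk hd
    omega
  | succ k ih =>
    intro d v F acc hk hd hv hvchar hFg hFnd hFmem
    cases F with
    | nil =>
      rw [levelLoop]
      have hlvlempty : ∀ j, lvlB n E s d j = false := by
        intro j
        cases hx : lvlB n E s d j
        · rfl
        · have := (hFmem j).mpr hx
          simp at this
      rw [Finset.sum_eq_zero, add_zero]
      intro j hj
      obtain ⟨hjn, hjb⟩ := Finset.mem_filter.mp hj
      apply levI_zero
      intro d'
      cases d with
      | zero =>
        have := lvlB_zero_self n E s
        rw [hlvlempty s] at this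
        exact Bool.noConfusion this
      | succ d0 =>
        rcases Nat.lt_or_ge d' (d0 + 1) with hlt | hge
        · cases hx : lvlB n E s d' j
          · rfl
          · have hb := ball_le (show d' ≤ d0 + 1 by omega) (lvl_ball hx)
            rw [hb] at hjb
            exact Bool.noConfusion hjb
        · have := lvl_empty_ge (d := d0) hlvlempty (d' - (d0 + 1)) j
          have harith : d0 + 1 + (d' - (d0 + 1)) = d' := by omega
          rwa [harith] at this
    | cons f0 Frest =>
      obtain ⟨new, c1, c2, c3, c4, c5, c6⟩ :=
        expandLevel_char hg hrows (f0 :: Frest) v [] hv hFg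
      rw [List.nil_append] at c1
      rw [levelLoop_cons, c1]
      have hQ := frontier_adj hg hchar hFg hFmem
      have hv' : ∀ j, pvGb (expandLevel g v [] (f0 :: Frest)).1 j
          = ballB n E s (d + 1) j := by
        intro j
        rw [c3 j, hvchar j, ball_succ_via_lvl hE hs d j]
        have hbe : ((f0 :: Frest).any
            (fun f => (PySem.List.pyGetD g f []).any (fun x => pvIx n x == j)))
            = ((List.range n).any (fun p => lvlB n E s d p && adjB n E p j)) := by
          rw [Bool.eq_iff_iff]
          exact (hQ j).trans range_any_iff.symm
        rw [hbe]
      have hnewmem : ∀ j, j ∈ new.map (pvIx n) ↔ lvlB n E s (d + 1) j = true := by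
        intro j
        constructor
        · intro hj
          obtain ⟨x, hx, hxe⟩ := List.mem_map.mp hj
          obtain ⟨hgx, hfresh, f, hf, hxrow⟩ := c4 x hx
          have hQx : ((f0 :: Frest).any
              (fun f' => (PySem.List.pyGetD g f' []).any (fun y => pvIx n y == pvIx n x))) = true :=
            List.any_eq_true.mpr ⟨f, hf, List.any_eq_true.mpr ⟨x, hxrow, by simp⟩⟩
          obtain ⟨p, hp, hlvl, hadj⟩ := (hQ (pvIx n x)).mp hQx
          have hball : ballB n E s (d + 1) (pvIx n x) = true :=
            ball_of_lvl_adj hp (lvl_ball hlvl) hadj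
          have hnotball : ballB n E s d (pvIx n x) = false := by
            rw [← hvchar (pvIx n x)]
            exact hfresh
          subst hxe
          rw [lvlB_succ, hball, hnotball]
          rfl
        · intro hj
          have hball : ballB n E s (d + 1) j = true := lvl_ball hj
          have hnotball : ballB n E s d j = false := lvl_not_ball_lt (by omega) hj
          rw [ball_succ_via_lvl hE hs d j] at hball
          rcases Bool.or_eq_true_iff.mp hball with hb1 | hb1
          · rw [hb1] at hnotball; exact Bool.noConfusion hnotball
          · obtain ⟨p, hp, hlvl, hadj⟩ := range_any_iff.mp hb1
            exact c6 j (by rw [hvchar j]; exact hnotball) ((hQ j).mpr ⟨p, hp, hlvl, hadj⟩)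
      have hdn : d < n := by
        have hmm : pvIx n f0 ∈ (f0 :: Frest).map (pvIx n) := by simp
        exact lvl_lt_n hE hs ((hFmem (pvIx n f0)).mp hmm)
      have hcast : ((d : Int) + 1) = (((d + 1 : Nat)) : Int) := by push_cast; ring
      rw [hcast]
      have hrec := ih (d + 1) (expandLevel g v [] (f0 :: Frest)).1 new
        (acc + (((d + 1 : Nat)) : Int) * ((new.length : Nat) : Int))
        (by omega) (by omega) c2 hv' (fun x hx => (c4 x hx).1) c5 hnewmem
      rw [hrec]
      -- split the remaining sum
      have hsplit := Finset.sum_filter_add_sum_filter_not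
        ((Finset.range n).filter (fun j => ballB n E s d j = false))
        (fun j => ballB n E s (d + 1) j = true) (levI n E s)
      have hset1 : ((Finset.range n).filter (fun j => ballB n E s d j = false)).filter
          (fun j => ballB n E s (d + 1) j = true)
          = (Finset.range n).filter (fun j => lvlB n E s (d + 1) j = true) := by
        rw [Finset.filter_filter]
        apply Finset.filter_congr
        intro j _
        constructor
        · rintro ⟨hb1, hb2⟩
          rw [lvlB_succ, hb2, hb1]
          rfl
        · intro hb1
          exact ⟨lvl_not_ball_lt (by omega) hb1, lvl_ball hb1⟩
      have hset2 : ((Finset.range n).filter (fun j => ballB n E s d j = false)).filter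
          (fun j => ¬(ballB n E s (d + 1) j = true))
          = (Finset.range n).filter (fun j => ballB n E s (d + 1) j = false) := by
        rw [Finset.filter_filter]
        apply Finset.filter_congr
        intro j _
        constructor
        · rintro ⟨_, hb2⟩
          cases hx : ballB n E s (d + 1) j
          · rfl
          · exact absurd hx hb2
        · intro hb1
          have hb : ballB n E s d j = false := by
            cases hx : ballB n E s d j
            · rfl
            · rw [ball_succ_mono hx] at hb1; exact Bool.noConfusion hb1
          exact ⟨hb, by rw [hb1]; exact Bool.noConfusion⟩
      rw [hset1, hset2] at hsplit
      have hlvlsum : ∑ j ∈ (Finset.range n).filter (fun j => lvlB n E s (d + 1) j = true),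
          levI n E s j = (((d + 1 : Nat)) : Int) * ((new.length : Nat) : Int) := by
        have hconst : ∀ j ∈ (Finset.range n).filter (fun j => lvlB n E s (d + 1) j = true),
            levI n E s j = (((d + 1 : Nat)) : Int) := by
          intro j hj
          exact levI_eq hE hs (Finset.mem_filter.mp hj).2
        rw [Finset.sum_congr rfl hconst, Finset.sum_const]
        have hcard : ((Finset.range n).filter (fun j => lvlB n E s (d + 1) j = true)).card
            = new.length := by
          have hsetq : (Finset.range n).filter (fun j => lvlB n E s (d + 1) j = true)
              = (new.map (pvIx n)).toFinset := by
            apply Finset.ext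
            intro j
            rw [List.mem_toFinset]
            rw [Finset.mem_filter, Finset.mem_range]
            constructor
            · rintro ⟨_, h2⟩
              exact (hnewmem j).mpr h2
            · intro hj
              refine ⟨?_, (hnewmem j).mp hj⟩
              obtain ⟨x, hx, hxe⟩ := List.mem_map.mp hj
              rw [← hxe]
              exact pvIx_lt (c4 x hx).1
          rw [hsetq, List.toFinset_card_of_nodup c5, List.length_map]
        rw [hcard]
        rw [nsmul_eq_mul, mul_comm]
      rw [hlvlsum] at hsplit
      rw [← hsplit]
      ring

-- helper: reading the initial vectors
lemma pvGb_init {n : Nat} {sIdx : Nat} (hs : sIdx < n) (j : Nat) :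
    pvGb ((List.replicate n false).set sIdx true) j = (j == sIdx) := by
  by_cases hj : j = sIdx
  · subst hj
    rw [pvGb_set_self (by simpa using hs) true]
    simp
  · rw [pvGb_set_ne hj]
    have hne : (j == sIdx) = false := by
      rw [beq_eq_false_iff_ne]
      exact hj
    rw [hne]
    simp only [pvGb, List.getD_eq_getElem?_getD, List.getElem?_replicate]
    split <;> rfl

lemma pvGi_init {n : Nat} {c v0 : Int} {sIdx : Nat} (hs : sIdx < n) (j : Nat) :
    pvGi ((List.replicate n c).set sIdx v0) j
      = if j = sIdx then v0 else (if j < n then c else 0) := by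
  by_cases hj : j = sIdx
  · subst hj
    rw [pvGi_set_self (by simpa using hs) v0]
    rw [if_pos rfl]
  · rw [pvGi_set_ne hj, if_neg hj]
    simp only [pvGi, List.getD_eq_getElem?_getD, List.getElem?_replicate]
    split <;> rfl

lemma pvGi_replicate_zero {n : Nat} (j : Nat) :
    pvGi (List.replicate n (0 : Int)) j = 0 := by
  simp only [pvGi, List.getD_eq_getElem?_getD, List.getElem?_replicate]
  split <;> rfl

-- A's score is the sum of all levels
lemma bfs_sum {N : Int} {edges : List (Int × Int)} (hN : 1 ≤ N)
    (hpre : Pre_find_kevin_bacon N edges) {n : Nat} (hn : ((n : Int)) = N + 1)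
    (i : Int) (h1 : 1 ≤ i) (h2 : i ≤ N) :
    bfs i (kbGraph N edges) N =
      ∑ j ∈ Finset.range n, levI n edges i.toNat j := by
  have hnn : (N + 1).toNat = n := by omega
  obtain ⟨hgl, hgood⟩ := kbGraph_spec (by omega) hpre
  rw [hnn] at hgl
  rw [hnn] at hgood
  have hchar := kbGraph_mem (show (0 : Int) ≤ N by omega) hpre
  rw [hnn] at hchar
  have hE : goodE n edges := by
    intro e he
    obtain ⟨⟨u1, u2⟩, u3, u4⟩ := hpre e he
    exact ⟨⟨by omega, by omega⟩, ⟨by omega, by omega⟩⟩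
  have hgi : pvGood n i := ⟨by omega, by omega⟩
  have hsx : pvIx n i = i.toNat := by
    unfold pvIx
    rw [if_pos (by omega)]
  have hs : i.toNat < n := by omega
  simp only [bfs, hnn]
  rw [pv_setD_good true (by simp) hgi, hsx]
  have hvlen : ((List.replicate n false).set i.toNat true).length = n := by simp
  have hmain := pv_main hgl hgood
    (2 * ((List.replicate n false).set i.toNat true).count false + 1)
    ((List.replicate n false).set i.toNat true)
    (List.replicate n (0 : Int)) [i] 0
    (by simp) hvlen (by simp)
    (by
      intro f hf
      have hfe : f = i := List.mem_singleton.mp hf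
      refine ⟨hfe ▸ hgi, ?_, ?_⟩
      · rw [hfe, hsx, pvGb_set_self (by simpa using hs) true]
      · rw [hfe]
        exact pvGi_replicate_zero (pvIx n i))
    (fun j _ _ => pvGi_replicate_zero j)
  rw [show (List.replicate n (0 : Int)).sum = 0 by simp] at hmain
  rw [hmain]
  have hwave := wave_sum hE hs hgl hgood hchar
    (n + 1) 0 ((List.replicate n false).set i.toNat true) [i] 0
    (by omega) (by omega) hvlen
    (fun j => by rw [pvGb_init hs j, ballB_zero])
    (by
      intro f hf
      have hfe : f = i := List.mem_singleton.mp hf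
      exact hfe ▸ hgi)
    (by simp)
    (by
      intro j
      simp only [List.map_cons, List.map_nil, List.mem_singleton]
      rw [lvlB_zero]
      constructor
      · intro hj
        rw [hj, hsx]
        exact beq_self_eq_true _
      · intro hj
        rw [hsx]
        exact beq_iff_eq.mp hj)
  simp only [Nat.cast_zero] at hwave
  rw [hwave, zero_add]
  have hfull := Finset.sum_filter_add_sum_filter_not (Finset.range n)
    (fun j => ballB n edges i.toNat 0 j = true) (levI n edges i.toNat)
  have hset2 : (Finset.range n).filter (fun j => ¬(ballB n edges i.toNat 0 j = true))
      = (Finset.range n).filter (fun j => ballB n edges i.toNat 0 j = false) := by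
    apply Finset.filter_congr
    intro j _
    constructor
    · intro hx
      cases hy : ballB n edges i.toNat 0 j
      · rfl
      · exact absurd hy hx
    · intro hx
      rw [hx]
      exact Bool.noConfusion
  have hset1 : (Finset.range n).filter (fun j => ballB n edges i.toNat 0 j = true)
      = {i.toNat} := by
    apply Finset.ext
    intro j
    rw [Finset.mem_filter, Finset.mem_range, Finset.mem_singleton, ballB_zero]
    constructor
    · rintro ⟨_, hbb⟩
      exact beq_iff_eq.mp hbb
    · intro hj
      subst hj
      exact ⟨hs, beq_self_eq_true _⟩
  rw [hset1, hset2] at hfull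
  have hstart : levI n edges i.toNat i.toNat = 0 := by
    have hl0 : lvlB n edges i.toNat 0 i.toNat = true := lvlB_zero_self n edges i.toNat
    have := levI_eq hE hs hl0
    simpa using this
  rw [Finset.sum_singleton, hstart, zero_add] at hfull
  rw [hfull]

-- B's score is the sum of all levels too
lemma bfScore_sum {N : Int} {edges : List (Int × Int)} (hN : 1 ≤ N)
    (hpre : Pre_find_kevin_bacon N edges) {n : Nat} (hn : ((n : Int)) = N + 1)
    (i : Int) (h1 : 1 ≤ i) (h2 : i ≤ N) :
    bfScore N edges i =
      ∑ j ∈ Finset.range n, levI n edges i.toNat j := by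
  have hnn : (N + 1).toNat = n := by omega
  have hE : goodE n edges := by
    intro e he
    obtain ⟨⟨u1, u2⟩, u3, u4⟩ := hpre e he
    exact ⟨⟨by omega, by omega⟩, ⟨by omega, by omega⟩⟩
  have hgi : pvGood n i := ⟨by omega, by omega⟩
  have hsx : pvIx n i = i.toNat := by
    unfold pvIx
    rw [if_pos (by omega)]
  have hs : i.toNat < n := by omega
  simp only [bfScore, hnn]
  rw [pv_setD_good 0 (by simp) hgi, hsx]
  have hD0get : ∀ j, pvGi ((List.replicate n (N + 1)).set i.toNat 0) j
      = if j = i.toNat then 0 else (if j < n then N + 1 else 0) :=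
    fun j => pvGi_init hs j
  have hlvl0s : lvlB n edges i.toNat 0 i.toNat = true := lvlB_zero_self n edges i.toNat
  have hinv : bfInv n edges i.toNat ((List.replicate n (N + 1)).set i.toNat 0) := by
    refine ⟨by simp, ?_, ?_, ?_, ?_⟩
    · intro d j hl
      rw [hD0get j]
      by_cases hj : j = i.toNat
      · subst hj
        have hd0 : d = 0 := lvl_unique hl hlvl0s
        subst hd0
        rw [if_pos rfl]
        exact le_refl 0
      · rw [if_neg hj, if_pos (ball_lt hE hs (lvl_ball hl))]
        have := lvl_lt_n hE hs hl
        have hcd : ((d : Int)) < (n : Int) := by exact_mod_cast this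
        omega
    · intro j hj
      rw [hD0get j]
      split <;> first | omega | (split <;> omega)
    · intro j hj hfin
      rw [hD0get j] at hfin
      by_cases hjs : j = i.toNat
      · subst hjs
        exact reach_of_ball hE hs (ballB_zero_self n edges i.toNat)
      · rw [if_neg hjs, if_pos hj] at hfin
        omega
    · rw [hD0get i.toNat, if_pos rfl]
  have hup : bfUp n edges i.toNat 0 ((List.replicate n (N + 1)).set i.toNat 0) := by
    intro d j hl hd
    have hd0 : d = 0 := by omega
    subst hd0
    have hjs : j = i.toNat := lvlB_zero_eq hl
    subst hjs
    rw [hD0get i.toNat, if_pos rfl]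
    exact le_refl 0
  have hfinal := bfRounds_final hE hs N.toNat 0 _ hinv hup (by omega)
  obtain ⟨hflen, hfval⟩ := hfinal
  rw [filter_lt_sum, hflen]
  apply Finset.sum_congr rfl
  intro j hj
  have hjn : j < n := Finset.mem_range.mp hj
  obtain ⟨hr, hu⟩ := hfval j hjn
  have hget : (bfRounds edges ((List.replicate n (N + 1)).set i.toNat 0) N.toNat).getD j 0
      = pvGi (bfRounds edges ((List.replicate n (N + 1)).set i.toNat 0) N.toNat) j := rfl
  rw [hget]
  cases hreach : ballB n edges i.toNat n j
  · rw [hu hreach, levI_zero (unreach_lvl hE hs hreach)]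
    rw [if_neg (by omega)]
  · rw [hr hreach]
    obtain ⟨d, _, hl⟩ := ball_to_lvl hreach
    have hlev := levI_eq hE hs hl
    have hdn := lvl_lt_n hE hs hl
    have hdi : ((d : Int)) < (n : Int) := by exact_mod_cast hdn
    rw [hlev, if_pos (by omega)]

lemma score_eq {N : Int} {edges : List (Int × Int)} (hN : 1 ≤ N)
    (hpre : Pre_find_kevin_bacon N edges) (i : Int) (h1 : 1 ≤ i) (h2 : i ≤ N) :
    bfs i (kbGraph N edges) N = bfScore N edges i := by
  have hn : (((N + 1).toNat : Int)) = N + 1 := Int.toNat_of_nonneg (by omega)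
  rw [bfs_sum hN hpre hn i h1 h2, bfScore_sum hN hpre hn i h1 h2]

-- ===== the selection loops =====

def pvStepA (k : Int → Int) (st : Option Int × Int) (i : Int) : Option Int × Int :=
  match st.1 with
  | none => (some (k i), i)
  | some m =>
    if k i < m then (some (k i), i)
    else if k i = m ∧ i < st.2 then (some m, i)
    else st

lemma find_A_eq_fold (N : Int) (edges : List (Int × Int)) :
    find_kevin_bacon N edges =
      ((PySem.List.pyRange 1 (N + 1) 1).foldl
        (pvStepA (fun i => bfs i (kbGraph N edges) N)) ((none : Option Int), (0 : Int))).2 := rfl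

def pvMfold (k : Int → Int) (a : Int) (xs : List Int) : Int :=
  xs.foldl (fun b x => if k x < k b then x else b) a

lemma pv_min?_eq (k : Int → Int) : ∀ (xs : List Int) (a : Int),
    PySem.List.min? (a :: xs) k = some (pvMfold k a xs) := by
  intro xs
  induction xs with
  | nil => intro a; simp [PySem.List.min?, pvMfold]
  | cons x rest ih =>
    intro a
    have h1 : PySem.List.min? (a :: x :: rest) k
        = PySem.List.min? ((if k x < k a then x else a) :: rest) k := by
      by_cases hx : k x < k a <;> simp only [PySem.List.min?, List.foldl_cons] <;> simp [hx]
    rw [h1, ih]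
    simp only [pvMfold, List.foldl_cons]

lemma pv_argmin (k : Int → Int) : ∀ (xs : List Int) (ans : Int),
    (∀ x ∈ xs, ans < x) → xs.Pairwise (· < ·) →
    xs.foldl (pvStepA k) (some (k ans), ans) =
      (some (k (pvMfold k ans xs)), pvMfold k ans xs) := by
  intro xs
  induction xs with
  | nil => intro ans _ _; simp [pvMfold]
  | cons x rest ih =>
    intro ans h hp
    have hax : ans < x := h x (by simp)
    obtain ⟨hpx, hpr⟩ := List.pairwise_cons.mp hp
    simp only [List.foldl_cons]
    have hstep : pvStepA k (some (k ans), ans) x =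
        (some (k (if k x < k ans then x else ans)), if k x < k ans then x else ans) := by
      simp only [pvStepA]
      by_cases hlt : k x < k ans
      · simp [hlt]
      · have hne : ¬(k x = k ans ∧ x < ans) := by
          rintro ⟨_, hxa⟩; omega
        simp [hlt, hne]
    rw [hstep]
    by_cases hlt : k x < k ans
    · simp only [hlt, if_true]
      rw [ih x (fun y hy => hpx y hy) hpr]
      simp [pvMfold, hlt]
    · simp only [hlt, if_false]
      rw [ih ans (fun y hy => lt_trans hax (hpx y hy)) hpr]
      simp [pvMfold, hlt]

-- ===== VERDICT =====
theorem find_kevin_bacon_spec : Claim_equal_find_kevin_bacon := by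
  intro N edges _ hpre
  unfold Spec_find_kevin_bacon
  by_cases hN : 1 ≤ N
  · have hcons : PySem.List.pyRange 1 (N + 1) 1 = 1 :: PySem.List.pyRange 2 (N + 1) 1 := by
      simpa using PySem.List.pyRange_one_cons (a := 1) (b := N + 1) (by omega)
    rw [find_A_eq_fold]
    have hkey : ∀ (st : Option Int × Int) (x : Int), x ∈ PySem.List.pyRange 1 (N + 1) 1 →
        pvStepA (fun i => bfs i (kbGraph N edges) N) st x
          = pvStepA (bfScore N edges) st x := by
      intro st x hx
      have hx' := (PySem.List.mem_pyRange_one).mp hx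
      have hbs := score_eq hN hpre x hx'.1 (by omega)
      simp only [pvStepA, hbs]
    rw [PySem.List.foldl_congr_mem _ _ (pvStepA (bfScore N edges)) _ hkey, hcons,
      List.foldl_cons]
    have h1 : pvStepA (bfScore N edges) ((none : Option Int), (0 : Int)) 1
        = (some (bfScore N edges 1), 1) := rfl
    rw [h1]
    have hgt : ∀ x ∈ PySem.List.pyRange 2 (N + 1) 1, (1 : Int) < x := by
      intro x hx
      have := (PySem.List.mem_pyRange_one).mp hx
      omega
    rw [pv_argmin (bfScore N edges) (PySem.List.pyRange 2 (N + 1) 1) 1 hgt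
      (PySem.List.pairwise_lt_pyRange_one 2 (N + 1))]
    unfold find_kevin_bacon_alt PySem.List.minD
    rw [hcons, pv_min?_eq]
    rfl
  · have hnil : PySem.List.pyRange 1 (N + 1) 1 = [] :=
      PySem.List.pyRange_one_eq_nil (by omega)
    rw [find_A_eq_fold]
    unfold find_kevin_bacon_alt PySem.List.minD
    rw [hnil]
    simp [PySem.List.min?]
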